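-- pv_equiv track=rewrite | github.com/RGZ1890/codetree-TILs | 241227/우리는 하나/we-are-the-one.py | solution
-- ===== SOURCE A (Python) =====
-- from collections import deque
--
-- dirs = [[-1, 0], [0, 1], [1, 0], [0, -1]]
--
-- def moveable(board, n, cur, nex, u, d):
--     if 0 <= nex[0] < n and 0 <= nex[1] < n:
--         diff = abs(board[cur[0]][cur[1]] - board[nex[0]][nex[1]])
--         return u <= diff <= d
--     return False
--
-- def bfs(board, n, visited, city, path, u, d):
--     q = deque()
--     q.append(city)
--
--     while q:
--         cur = q.popleft()
--         path.add((cur[0], cur[1]))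
--         for di in dirs:
--             nex = [cur[0] + di[0], cur[1] + di[1]]
--             if moveable(board, n, cur, nex, u, d) \
--             and not visited[nex[0]][nex[1]]:
--                 visited[nex[0]][nex[1]] = True
--                 q.append(nex)
--
--     return path
--
-- def pick_city(cities, c, k, picked, cur, res):
--     if len(picked) > k:
--         return res
--     if len(picked) == k:
--         return res + [picked]
--     if cur == c:
--         return res
--
--     res = pick_city(cities, c, k, picked + [cities[cur]], cur + 1, res)
--     res = pick_city(cities, c, k, picked, cur + 1, res)
--
--     return res
--
-- def solution(board, n, k, u, d):
--     cities = []
--     for i in range(n):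
--         for j in range(n):
--             cities.append([i, j])
--     res = pick_city(cities, n ** 2, k, [], 0, [])
--
--     ans = 0
--     for comb in res:
--         path = set()
--         visited = [[False] * n for _ in range(n)]
--         for city in comb:
--             if not visited[city[0]][city[1]]:
--                 visited[city[0]][city[1]] = True
--                 path = bfs(board, n, visited, city, path, u, d)
--
--         ans = max(ans, len(path))
--         if ans == n ** 2:
--             return ans
--
--     return ans
-- ===== SOURCE B (Python) =====
-- def solution(board, n, k, u, d):
--     # connected components once; answer = sum of the k largest component sizes
--     if k <= 0 or n * n < k:
--         return 0
--     def edge(x, y, p, q):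
--         if 0 <= p < n and 0 <= q < n:
--             diff = abs(board[x][y] - board[p][q])
--             return u <= diff <= d
--         return False
--     seen = set()
--     sizes = []
--     for i in range(n):
--         for j in range(n):
--             if (i, j) not in seen:
--                 comp = {(i, j)}
--                 frontier = [(i, j)]
--                 while frontier:
--                     new = []
--                     for (x, y) in frontier:
--                         for (dx, dy) in ((-1, 0), (0, 1), (1, 0), (0, -1)):
--                             p, q = x + dx, y + dy
--                             if (p, q) not in comp and edge(x, y, p, q):
--                                 comp.add((p, q))
--                                 new.append((p, q))
--                     frontier = new
--                 seen |= comp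
--                 sizes.append(len(comp))
--     sizes.sort(reverse=True)
--     return sum(sizes[:k])
-- ===== Notes on version B (the rewrite author's own statement) =====
-- stated objective: faster
-- what changed: A enumerates every k-subset of the n*n cells (recursive pick_city) and runs a fresh multi-source BFS for each subset; B computes the connected components of the grid once by frontier expansion, sorts the component sizes descending and returns the sum of the k largest.
-- outside the precondition, e.g. on solution([], 1, 1, 0, 0): A returns 1, B returns 1
import Mathlib
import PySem

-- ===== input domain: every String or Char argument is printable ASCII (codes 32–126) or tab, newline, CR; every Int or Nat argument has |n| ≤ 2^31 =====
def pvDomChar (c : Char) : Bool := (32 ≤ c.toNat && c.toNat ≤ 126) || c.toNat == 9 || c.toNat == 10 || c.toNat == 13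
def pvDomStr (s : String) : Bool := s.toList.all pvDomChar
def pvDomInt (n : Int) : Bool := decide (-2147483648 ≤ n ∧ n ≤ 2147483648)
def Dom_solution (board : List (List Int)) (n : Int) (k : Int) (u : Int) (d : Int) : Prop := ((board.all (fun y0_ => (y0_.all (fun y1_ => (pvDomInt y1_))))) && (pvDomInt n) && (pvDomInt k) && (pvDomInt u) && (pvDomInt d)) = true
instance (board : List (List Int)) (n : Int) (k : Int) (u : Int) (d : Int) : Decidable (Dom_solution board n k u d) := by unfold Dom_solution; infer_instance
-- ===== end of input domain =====

-- B computes the connected components of the grid once and sums the k largest component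
-- sizes, replacing A's enumeration of every k-subset of cells with a BFS per subset.


-- ===== PORT A =====
def pvDirs : List (Int × Int) := [(-1, 0), (0, 1), (1, 0), (0, -1)]

-- board[p][q] (indices are nonnegative and in range wherever A evaluates this under Pre_)
def pvVal (board : List (List Int)) (p q : Int) : Int :=
  PySem.List.pyGetD (PySem.List.pyGetD board p []) q 0

def moveable (board : List (List Int)) (n : Int) (cur nex : Int × Int) (u d : Int) : Bool :=
  if 0 ≤ nex.1 ∧ nex.1 < n ∧ 0 ≤ nex.2 ∧ nex.2 < n then
    let diff := |pvVal board cur.1 cur.2 - pvVal board nex.1 nex.2|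
    decide (u ≤ diff ∧ diff ≤ d)
  else false

-- visited[p][q]
def pvVGet (v : List (List Bool)) (p : Int × Int) : Bool :=
  PySem.List.pyGetD (PySem.List.pyGetD v p.1 []) p.2 false

-- visited[p][q] = True
def pvVSet (v : List (List Bool)) (p : Int × Int) : List (List Bool) :=
  PySem.List.pySetD v p.1 (PySem.List.pySetD (PySem.List.pyGetD v p.1 []) p.2 true)

-- body of 'for di in dirs' inside bfs
def aStep (board : List (List Int)) (n u d : Int) (cur : Int × Int)
    (st : List (List Bool) × List (Int × Int)) (di : Int × Int) :
    List (List Bool) × List (Int × Int) :=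
  let nex := (cur.1 + di.1, cur.2 + di.2)
  if moveable board n cur nex u d && !pvVGet st.1 nex then
    (pvVSet st.1 nex, st.2 ++ [nex])
  else st

-- the 'while q' loop of bfs; the fuel argument only makes the recursion total
-- (under Pre_ the supplied fuel is proved sufficient by the lemmas below)
def bfsLoop (board : List (List Int)) (n u d : Int) :
    Nat → List (Int × Int) → List (List Bool) → PySem.Set (Int × Int) →
    PySem.Set (Int × Int) × List (List Bool)
  | 0, _, visited, path => (path, visited)
  | _ + 1, [], visited, path => (path, visited)
  | fuel + 1, cur :: q, visited, path =>
    let st := pvDirs.foldl (aStep board n u d cur) (visited, q)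
    bfsLoop board n u d fuel st.2 st.1 (PySem.Set.add path cur)

def pvBfs (board : List (List Int)) (n : Int) (visited : List (List Bool)) (city : Int × Int)
    (path : PySem.Set (Int × Int)) (u d : Int) : PySem.Set (Int × Int) × List (List Bool) :=
  bfsLoop board n u d (2 * (n * n).toNat + 2) [city] visited path

def pick_city (cities : List (Int × Int)) (c k : Int) (picked : List (Int × Int)) (cur : Int)
    (res : List (List (Int × Int))) : List (List (Int × Int)) :=
  if k < (picked.length : Int) then res
  else if (picked.length : Int) = k then res ++ [picked]
  else if c ≤ cur then res   -- Python tests cur == c; every call has cur ≤ c, '≤' only totalizes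
  else
    let res1 := pick_city cities c k (picked ++ [PySem.List.pyGetD cities cur (0, 0)]) (cur + 1) res
    pick_city cities c k picked (cur + 1) res1
termination_by (c - cur).toNat
decreasing_by all_goals (simp_wf; omega)

-- body of 'for city in comb'
def cityStep (board : List (List Int)) (n u d : Int)
    (st : PySem.Set (Int × Int) × List (List Bool)) (city : Int × Int) :
    PySem.Set (Int × Int) × List (List Bool) :=
  if !pvVGet st.2 city then pvBfs board n (pvVSet st.2 city) city st.1 u d else st

-- the 'for comb in res' loop with its early return 'if ans == n ** 2'
def ansLoop (board : List (List Int)) (n u d : Int) :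
    List (List (Int × Int)) → Int → Int
  | [], ans => ans
  | comb :: rest, ans =>
    let visited := List.replicate n.toNat (List.replicate n.toNat false)
    let st := comb.foldl (cityStep board n u d) (([] : PySem.Set (Int × Int)), visited)
    let ans1 := max ans (PySem.Set.len st.1)
    if ans1 = n ^ 2 then ans1 else ansLoop board n u d rest ans1

def solution (board : List (List Int)) (n : Int) (k : Int) (u : Int) (d : Int) : Int :=
  let cities := (PySem.List.pyRange 0 n 1).foldl (fun acc i =>
      (PySem.List.pyRange 0 n 1).foldl (fun acc2 j => acc2 ++ [(i, j)]) acc) []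
  let res := pick_city cities (n ^ 2) k [] 0 []
  ansLoop board n u d res 0

-- ===== PORT B =====
def pvDirsB : List (Int × Int) := [(-1, 0), (0, 1), (1, 0), (0, -1)]

def pvValB (board : List (List Int)) (p q : Int) : Int :=
  PySem.List.pyGetD (PySem.List.pyGetD board p []) q 0

def edgeB (board : List (List Int)) (n u d : Int) (x y p q : Int) : Bool :=
  if 0 ≤ p ∧ p < n ∧ 0 ≤ q ∧ q < n then
    let diff := |pvValB board x y - pvValB board p q|
    decide (u ≤ diff ∧ diff ≤ d)
  else false

-- body of 'for (dx, dy) in …' inside the frontier scan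
def bStep (board : List (List Int)) (n u d : Int) (cell : Int × Int)
    (st : PySem.Set (Int × Int) × List (Int × Int)) (di : Int × Int) :
    PySem.Set (Int × Int) × List (Int × Int) :=
  let p := (cell.1 + di.1, cell.2 + di.2)
  if !(PySem.Set.contains st.1 p) && edgeB board n u d cell.1 cell.2 p.1 p.2 then
    (PySem.Set.add st.1 p, st.2 ++ [p])
  else st

-- the 'while frontier' loop; fuel only makes the recursion total
-- (under Pre_ the supplied fuel is proved sufficient by the lemmas below)
def growB (board : List (List Int)) (n u d : Int) :
    Nat → PySem.Set (Int × Int) → List (Int × Int) → PySem.Set (Int × Int)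
  | 0, comp, _ => comp
  | _ + 1, comp, [] => comp
  | fuel + 1, comp, c :: frontier =>
    let st := (c :: frontier).foldl (fun st cell => pvDirsB.foldl (bStep board n u d cell) st)
      (comp, ([] : List (Int × Int)))
    growB board n u d fuel st.1 st.2

-- body of the cell scan ('if (i, j) not in seen: …')
def bCellStep (board : List (List Int)) (n u d : Int)
    (st : PySem.Set (Int × Int) × List Int) (cell : Int × Int) :
    PySem.Set (Int × Int) × List Int :=
  if !(PySem.Set.contains st.1 cell) then
    let comp := growB board n u d ((n * n).toNat + 1) (PySem.Set.ofList [cell]) [cell]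
    (PySem.Set.union st.1 comp, st.2 ++ [PySem.Set.len comp])
  else st

def solution_alt (board : List (List Int)) (n : Int) (k : Int) (u : Int) (d : Int) : Int :=
  if k ≤ 0 || n * n < k then 0
  else
    let st := (PySem.List.pyRange 0 n 1).foldl
      (fun (st : PySem.Set (Int × Int) × List Int) i =>
        (PySem.List.pyRange 0 n 1).foldl (fun st2 j => bCellStep board n u d st2 (i, j)) st)
      (PySem.Set.empty, [])
    let srt := PySem.List.sorted st.2 (fun x => x) true
    (PySem.List.slice srt none (some k)).sum

-- ===== PRECONDITION & SPEC =====
-- Pre_ excludes boards that do not cover the n×n grid (missing rows/short rows) when a city is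
-- actually traversed: there A raises IndexError, except in the degenerate n = 1, k = 1 case,
-- where A returns 1 without reading the board (and B returns 1 as well); it also excludes
-- n < 0 with 0 < k, where A raises IndexError in pick_city while B returns 0.
def Pre_solution (board : List (List Int)) (n : Int) (k : Int) (u : Int) (d : Int) : Prop :=
  k ≤ 0 ∨ (0 ≤ n ∧ n * n < k) ∨
  (0 ≤ n ∧ n ≤ (board.length : Int) ∧ ∀ row ∈ board.take n.toNat, n ≤ (row.length : Int))
instance (board : List (List Int)) (n : Int) (k : Int) (u : Int) (d : Int) :
    Decidable (Pre_solution board n k u d) := by unfold Pre_solution; infer_instance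

def pvWitness_solution : List (List Int) × Int × Int × Int × Int := ([[0, 1], [3, 2]], 2, 2, 0, 1)

def Spec_solution (board : List (List Int)) (n : Int) (k : Int) (u : Int) (d : Int) (out : Int) : Prop := out = solution_alt board n k u d
instance (board : List (List Int)) (n : Int) (k : Int) (u : Int) (d : Int) (out : Int) : Decidable (Spec_solution board n k u d out) := by unfold Spec_solution; infer_instance

-- ===== CLAIM (what is proved, stated in full; the proofs are below) =====
def Claim_equal_solution : Prop := ∀ (board : List (List Int)) (n : Int) (k : Int) (u : Int) (d : Int), Dom_solution board n k u d → Pre_solution board n k u d → Spec_solution board n k u d (solution board n k u d)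

-- ===== LEMMAS AND PROOFS =====

-- ---------- abstract layer: grid, adjacency, reachability ----------

def pvInG (n : Int) (p : Int × Int) : Prop := 0 ≤ p.1 ∧ p.1 < n ∧ 0 ≤ p.2 ∧ p.2 < n

def pvAdj (B : List (List Int)) (n u d : Int) (c z : Int × Int) : Prop :=
  pvInG n c ∧ pvInG n z ∧
  ((z.1 = c.1 - 1 ∧ z.2 = c.2) ∨ (z.1 = c.1 ∧ z.2 = c.2 + 1) ∨
   (z.1 = c.1 + 1 ∧ z.2 = c.2) ∨ (z.1 = c.1 ∧ z.2 = c.2 - 1)) ∧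
  u ≤ |pvVal B c.1 c.2 - pvVal B z.1 z.2| ∧ |pvVal B c.1 c.2 - pvVal B z.1 z.2| ≤ d

def pvReach (B : List (List Int)) (n u d : Int) : (Int × Int) → (Int × Int) → Prop :=
  Relation.ReflTransGen (pvAdj B n u d)

def cellsL (n : Int) : List (Int × Int) :=
  (PySem.List.pyRange 0 n 1).flatMap (fun i => (PySem.List.pyRange 0 n 1).map (fun j => (i, j)))

def IsCompList (B : List (List Int)) (n u d : Int) (r : Int × Int) (L : List (Int × Int)) : Prop :=
  L.Nodup ∧ ∀ p, p ∈ L ↔ pvReach B n u d r p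

theorem pvAdj_symm (B : List (List Int)) (n u d : Int) {c z : Int × Int}
    (h : pvAdj B n u d c z) : pvAdj B n u d z c := by
  obtain ⟨h1, h2, h3, h4, h5⟩ := h
  refine ⟨h2, h1, by rcases h3 with h|h|h|h <;> omega, ?_, ?_⟩ <;>
    rw [abs_sub_comm] <;> assumption

theorem pvReach_symm (B : List (List Int)) (n u d : Int) {c z : Int × Int}
    (h : pvReach B n u d c z) : pvReach B n u d z c :=
  Relation.ReflTransGen.symmetric (fun _ _ hh => pvAdj_symm B n u d hh) h

theorem pvReach_trans (B : List (List Int)) (n u d : Int) {a b c : Int × Int}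
    (h1 : pvReach B n u d a b) (h2 : pvReach B n u d b c) : pvReach B n u d a c :=
  Relation.ReflTransGen.trans h1 h2

theorem pvReach_inG (B : List (List Int)) (n u d : Int) {r p : Int × Int}
    (h0 : pvInG n r) (h : pvReach B n u d r p) : pvInG n p := by
  induction h with
  | refl => exact h0
  | tail _ hadj ih => exact hadj.2.1

theorem reach_mem_of_closed (B : List (List Int)) (n u d : Int) {S : List (Int × Int)}
    {start p : Int × Int} (h0 : start ∈ S)
    (hcl : ∀ x ∈ S, ∀ z, pvAdj B n u d x z → z ∈ S)
    (h : pvReach B n u d start p) : p ∈ S := by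
  induction h with
  | refl => exact h0
  | tail _ hadj ih => exact hcl _ ih _ hadj

theorem mem_cellsL (n : Int) (p : Int × Int) : p ∈ cellsL n ↔ pvInG n p := by
  simp [cellsL, PySem.List.mem_pyRange_one, pvInG]
  constructor
  · rintro ⟨i, ⟨h1, h2⟩, j, ⟨h3, h4⟩, rfl⟩; exact ⟨h1, h2, h3, h4⟩
  · rintro ⟨h1, h2, h3, h4⟩; exact ⟨p.1, ⟨h1, h2⟩, p.2, ⟨h3, h4⟩, rfl⟩

theorem nodup_cellsL (n : Int) : (cellsL n).Nodup := by
  unfold cellsL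
  refine List.nodup_flatMap.2 ⟨?_, ?_⟩
  · intro i _
    exact (PySem.List.nodup_pyRange_one 0 n).map (fun a b h => by simpa using congrArg Prod.snd h)
  · refine (PySem.List.nodup_pyRange_one 0 n).imp ?_
    intro i j hij p hp hq
    simp at hp hq
    obtain ⟨_, _, rfl⟩ := hp
    obtain ⟨_, _, h⟩ := hq
    exact hij (by simpa using congrArg Prod.fst h.symm)

theorem length_cellsL (n : Int) (hn : 0 ≤ n) : (cellsL n).length = (n * n).toNat := by
  simp [cellsL, List.length_flatMap, PySem.List.length_pyRange_one]
  conv_rhs => rw [← Int.toNat_of_nonneg hn]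
  rw [← Nat.cast_mul, Int.toNat_natCast]

theorem moveable_true_iff (B : List (List Int)) (n u d : Int) (c z : Int × Int) :
    moveable B n c z u d = true ↔
      (pvInG n z ∧ u ≤ |pvVal B c.1 c.2 - pvVal B z.1 z.2| ∧
        |pvVal B c.1 c.2 - pvVal B z.1 z.2| ≤ d) := by
  unfold moveable pvInG
  split <;> simp_all

theorem adj_iff (B : List (List Int)) (n u d : Int) {c : Int × Int} (z : Int × Int)
    (hc : pvInG n c) :
    pvAdj B n u d c z ↔
      ∃ di ∈ pvDirs, z = (c.1 + di.1, c.2 + di.2) ∧ moveable B n c z u d = true := by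
  constructor
  · rintro ⟨h1, h2, h3, h4, h5⟩
    have hm : moveable B n c z u d = true := (moveable_true_iff B n u d c z).2 ⟨h2, h4, h5⟩
    rcases h3 with ⟨ha, hb⟩ | ⟨ha, hb⟩ | ⟨ha, hb⟩ | ⟨ha, hb⟩
    · exact ⟨(-1, 0), by simp [pvDirs], by ext <;> simp <;> omega, hm⟩
    · exact ⟨(0, 1), by simp [pvDirs], by ext <;> simp <;> omega, hm⟩
    · exact ⟨(1, 0), by simp [pvDirs], by ext <;> simp <;> omega, hm⟩
    · exact ⟨(0, -1), by simp [pvDirs], by ext <;> simp <;> omega, hm⟩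
  · rintro ⟨di, hdi, rfl, hm⟩
    obtain ⟨h2, h4, h5⟩ := (moveable_true_iff B n u d c _).1 hm
    refine ⟨hc, h2, ?_, h4, h5⟩
    simp [pvDirs] at hdi
    rcases hdi with ⟨rfl, rfl⟩ | ⟨rfl, rfl⟩ | ⟨rfl, rfl⟩ | ⟨rfl, rfl⟩ <;> simp <;> omega

theorem compList_disjoint (B : List (List Int)) (n u d : Int) {r s : Int × Int}
    {L M : List (Int × Int)} (hL : IsCompList B n u d r L) (hM : IsCompList B n u d s M)
    (hrs : ¬ pvReach B n u d r s) : ∀ x ∈ L, x ∉ M := by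
  intro x hx hxM
  exact hrs (pvReach_trans B n u d ((hL.2 x).1 hx) (pvReach_symm B n u d ((hM.2 x).1 hxM)))


-- ---------- B-side traversal correctness ----------

theorem pvDirsB_eq : pvDirsB = pvDirs := rfl

theorem filter_not_mem_lt (l : List (Int × Int)) (comp comp' : List (Int × Int))
    (hsub : ∀ y ∈ comp, y ∈ comp') (x : Int × Int) (hx : x ∈ l) (hxc : x ∉ comp) (hxc' : x ∈ comp') :
    (l.filter (fun p => !decide (p ∈ comp'))).length < (l.filter (fun p => !decide (p ∈ comp))).length := by
  obtain ⟨s, t, rfl⟩ := List.append_of_mem hx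
  simp only [← List.countP_eq_length_filter, List.countP_append, List.countP_cons]
  have h1 : List.countP (fun p => !decide (p ∈ comp')) s ≤ List.countP (fun p => !decide (p ∈ comp)) s :=
    List.countP_mono_left (fun a _ h => by simp at h ⊢; exact fun hc => h (hsub a hc))
  have h2 : List.countP (fun p => !decide (p ∈ comp')) t ≤ List.countP (fun p => !decide (p ∈ comp)) t :=
    List.countP_mono_left (fun a _ h => by simp at h ⊢; exact fun hc => h (hsub a hc))
  simp [hxc, hxc']
  omega

theorem bDirs_spec (B : List (List Int)) (n u d : Int) (cell : Int × Int) :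
    ∀ (ds : List (Int × Int)) (st : PySem.Set (Int × Int) × List (Int × Int)), st.1.Nodup →
    ∃ δ, ds.foldl (bStep B n u d cell) st = (st.1 ++ δ, st.2 ++ δ) ∧ (st.1 ++ δ).Nodup ∧
      (∀ x ∈ δ, ∃ di ∈ ds, x = (cell.1 + di.1, cell.2 + di.2) ∧ moveable B n cell x u d = true) ∧
      (∀ di ∈ ds, moveable B n cell (cell.1 + di.1, cell.2 + di.2) u d = true →
        (cell.1 + di.1, cell.2 + di.2) ∈ st.1 ++ δ) := by
  intro ds
  induction ds with
  | nil => intro st h; exact ⟨[], by simp, by simpa using h, by simp, by simp⟩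
  | cons di ds ih =>
    intro st hnd
    rw [List.foldl_cons]
    by_cases hc : (!(PySem.Set.contains st.1 (cell.1 + di.1, cell.2 + di.2)) &&
        edgeB B n u d cell.1 cell.2 (cell.1 + di.1) (cell.2 + di.2)) = true
    · have hstep : bStep B n u d cell st di =
          (st.1 ++ [(cell.1 + di.1, cell.2 + di.2)], st.2 ++ [(cell.1 + di.1, cell.2 + di.2)]) := by
        unfold bStep
        simp only [hc, if_pos]
        have hmem : (cell.1 + di.1, cell.2 + di.2) ∉ st.1 := by
          simp at hc
          simpa [PySem.Set.contains_iff] using hc.1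
        rw [PySem.Set.add_of_not_mem hmem]
      have hmv : moveable B n cell (cell.1 + di.1, cell.2 + di.2) u d = true := by
        simp at hc; exact hc.2
      have hnotmem : (cell.1 + di.1, cell.2 + di.2) ∉ st.1 := by
        simp at hc; simpa [PySem.Set.contains_iff] using hc.1
      have hnd2 : (st.1 ++ [(cell.1 + di.1, cell.2 + di.2)]).Nodup := by
        simp [List.nodup_append, hnd]
        intro a b hab ha hb
        exact hnotmem (by rw [← ha, ← hb]; exact hab)
      obtain ⟨δ, heq, h1, h2, h3⟩ := ih (st.1 ++ [(cell.1 + di.1, cell.2 + di.2)],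
        st.2 ++ [(cell.1 + di.1, cell.2 + di.2)]) hnd2
      refine ⟨(cell.1 + di.1, cell.2 + di.2) :: δ, ?_, ?_, ?_, ?_⟩
      · rw [hstep, heq]; simp
      · simpa using h1
      · intro x hx
        rcases hx with _ | hx
        · exact ⟨di, List.mem_cons_self, rfl, hmv⟩
        · obtain ⟨di', hdi', hx, hmv'⟩ := h2 x (by assumption)
          exact ⟨di', List.mem_cons_of_mem _ hdi', hx, hmv'⟩
      · intro di' hdi' hmv'
        rcases List.mem_cons.1 hdi' with rfl | hdi'
        · simp
        · have := h3 di' hdi' hmv'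
          simpa using this
    · have hstep : bStep B n u d cell st di = st := by
        unfold bStep; simp only [hc]; rfl
      obtain ⟨δ, heq, h1, h2, h3⟩ := ih st hnd
      refine ⟨δ, by rw [hstep, heq], h1, ?_, ?_⟩
      · intro x hx
        obtain ⟨di', hdi', hx, hmv'⟩ := h2 x hx
        exact ⟨di', List.mem_cons_of_mem _ hdi', hx, hmv'⟩
      · intro di' hdi' hmv'
        rcases List.mem_cons.1 hdi' with rfl | hdi'
        · have he : edgeB B n u d cell.1 cell.2 (cell.1 + di'.1) (cell.2 + di'.2) = true := hmv'
          simp [he] at hc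
          exact List.mem_append_left _ (by simpa [PySem.Set.contains_iff] using hc)
        · exact h3 di' hdi' hmv'

theorem bScan_spec (B : List (List Int)) (n u d : Int) :
    ∀ (cells : List (Int × Int)) (st : PySem.Set (Int × Int) × List (Int × Int)),
    st.1.Nodup → (∀ cl ∈ cells, pvInG n cl) →
    ∃ δ, cells.foldl (fun st cell => pvDirsB.foldl (bStep B n u d cell) st) st = (st.1 ++ δ, st.2 ++ δ) ∧
      (st.1 ++ δ).Nodup ∧ (∀ x ∈ δ, ∃ cl ∈ cells, pvAdj B n u d cl x) ∧
      (∀ cl ∈ cells, ∀ z, pvAdj B n u d cl z → z ∈ st.1 ++ δ) := by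
  intro cells
  induction cells with
  | nil => intro st h _; exact ⟨[], by simp, by simpa using h, by simp, by simp⟩
  | cons cl cells ih =>
    intro st hnd hG
    obtain ⟨δ1, heq1, hnd1, h21, h31⟩ := bDirs_spec B n u d cl pvDirsB st hnd
    obtain ⟨δ2, heq2, hnd2, h22, h32⟩ := ih (st.1 ++ δ1, st.2 ++ δ1) hnd1
      (fun c hc => hG c (List.mem_cons_of_mem _ hc))
    rw [List.foldl_cons, heq1]
    refine ⟨δ1 ++ δ2, by rw [heq2]; simp, by simpa [List.append_assoc] using hnd2, ?_, ?_⟩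
    · intro x hx
      rcases List.mem_append.1 hx with hx | hx
      · obtain ⟨di, hdi, rfl, hmv⟩ := h21 x hx
        refine ⟨cl, List.mem_cons_self, ?_⟩
        rw [adj_iff B n u d _ (hG cl List.mem_cons_self)]
        exact ⟨di, by rwa [pvDirsB_eq] at hdi, rfl, hmv⟩
      · obtain ⟨c, hc, hadj⟩ := h22 x hx
        exact ⟨c, List.mem_cons_of_mem _ hc, hadj⟩
    · intro c hc z hadj
      rcases List.mem_cons.1 hc with rfl | hc
      · obtain ⟨di, hdi, rfl, hmv⟩ := (adj_iff B n u d z (hG c List.mem_cons_self)).1 hadj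
        have := h31 di (by rwa [pvDirsB_eq]) hmv
        rw [← List.append_assoc]
        exact List.mem_append_left _ this
      · have := h32 c hc z hadj
        simpa [List.append_assoc] using this

theorem growB_spec (B : List (List Int)) (n u d : Int) (start : Int × Int) :
    ∀ (fuel : Nat) (comp : PySem.Set (Int × Int)) (frontier : List (Int × Int)),
    comp.Nodup → (∀ x ∈ frontier, x ∈ comp) → (∀ x ∈ comp, pvReach B n u d start x) →
    start ∈ comp → (∀ x ∈ comp, pvInG n x) →
    (∀ x ∈ comp, (∀ z, pvAdj B n u d x z → z ∈ comp) ∨ x ∈ frontier) →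
    (frontier = [] ∨ ((cellsL n).filter (fun p => !decide (p ∈ comp))).length + 1 ≤ fuel) →
    IsCompList B n u d start (growB B n u d fuel comp frontier) := by
  intro fuel
  induction fuel with
  | zero =>
    intro comp frontier h1 h2 h3 h4 h5 h6 h7
    have hf : frontier = [] := by
      rcases h7 with h | h
      · exact h
      · exact absurd h (by omega)
    subst hf
    refine ⟨by simpa [growB] using h1, fun p => ⟨fun hp => by simpa [growB] using h3 p (by simpa [growB] using hp), fun hp => ?_⟩⟩
    show p ∈ growB B n u d 0 comp []
    simp only [growB]
    exact reach_mem_of_closed B n u d h4 (fun x hx z hz => (h6 x hx).elim (fun h => h z hz) (by simp)) hp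
  | succ fuel ih =>
    intro comp frontier h1 h2 h3 h4 h5 h6 h7
    match frontier with
    | [] =>
      refine ⟨by simpa [growB] using h1, fun p => ⟨fun hp => by simpa [growB] using h3 p (by simpa [growB] using hp), fun hp => ?_⟩⟩
      show p ∈ growB B n u d (fuel + 1) comp []
      simp only [growB]
      exact reach_mem_of_closed B n u d h4 (fun x hx z hz => (h6 x hx).elim (fun h => h z hz) (by simp)) hp
    | c :: f =>
      obtain ⟨δ, heq, hnd, hadjs, hcl⟩ := bScan_spec B n u d (c :: f) (comp, [])
        h1 (fun cl hcl => h5 cl (h2 cl hcl))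
      show IsCompList B n u d start (growB B n u d (fuel + 1) comp (c :: f))
      rw [growB, heq]
      simp only []
      have hδG : ∀ x ∈ δ, pvInG n x := fun x hx => by
        obtain ⟨cl, _, hadj⟩ := hadjs x hx; exact hadj.2.1
      have hδR : ∀ x ∈ δ, pvReach B n u d start x := fun x hx => by
        obtain ⟨cl, hclm, hadj⟩ := hadjs x hx
        exact Relation.ReflTransGen.tail (h3 cl (h2 cl hclm)) hadj
      apply ih (comp ++ δ) δ hnd (fun x hx => List.mem_append_right _ hx)
        (fun x hx => (List.mem_append.1 hx).elim (h3 x) (hδR x))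
        (List.mem_append_left _ h4)
        (fun x hx => (List.mem_append.1 hx).elim (h5 x) (hδG x))
      · intro x hx
        rcases List.mem_append.1 hx with hx | hx
        · rcases h6 x hx with hcls | hfr
          · exact Or.inl (fun z hz => List.mem_append_left _ (hcls z hz))
          · exact Or.inl (fun z hz => hcl x hfr z hz)
        · exact Or.inr hx
      · match δ with
        | [] => exact Or.inl rfl
        | x :: δ' =>
          right
          rcases h7 with h | h
          · exact absurd h (by simp)
          have hx1 : x ∉ comp := by
            have := List.disjoint_of_nodup_append hnd
            exact fun hc => this hc List.mem_cons_self
          have hlt := filter_not_mem_lt (cellsL n) comp (comp ++ (x :: δ'))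
            (fun y hy => List.mem_append_left _ hy) x
            ((mem_cellsL n x).2 (hδG x List.mem_cons_self)) hx1 (List.mem_append_right _ List.mem_cons_self)
          omega

-- ---------- B-side outer scan ----------

theorem forall2_mem_left {α β : Type} {R : α → β → Prop} :
    ∀ {l₁ : List α} {l₂ : List β}, List.Forall₂ R l₁ l₂ → ∀ {a}, a ∈ l₁ → ∃ b ∈ l₂, R a b := by
  intro l₁ l₂ h
  induction h with
  | nil => intro a ha; cases ha
  | cons hr _ ih =>
    intro a ha
    rcases List.mem_cons.1 ha with rfl | ha
    · exact ⟨_, List.mem_cons_self, hr⟩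
    · obtain ⟨b, hb, hRb⟩ := ih ha
      exact ⟨b, List.mem_cons_of_mem _ hb, hRb⟩

theorem setLen_eq (s : PySem.Set (Int × Int)) : PySem.Set.len s = (s.length : Int) := by
  simp [PySem.Set.len, pysem]

def InvB (B : List (List Int)) (n u d : Int) (procd : List (Int × Int))
    (st : PySem.Set (Int × Int) × List Int) : Prop :=
  ∃ reps Ls, st.1.Nodup ∧ List.Forall₂ (IsCompList B n u d) reps Ls ∧
    (∀ r ∈ reps, pvInG n r) ∧ reps.Pairwise (fun r s => ¬ pvReach B n u d r s) ∧
    st.2 = Ls.map (fun L => (L.length : Int)) ∧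
    (∀ p, p ∈ st.1 ↔ ∃ L ∈ Ls, p ∈ L) ∧ (∀ cl ∈ procd, cl ∈ st.1)

theorem bCells_inv (B : List (List Int)) (n u d : Int) (hn : 0 ≤ n) :
    ∀ (cells : List (Int × Int)) (st : PySem.Set (Int × Int) × List Int) (procd : List (Int × Int)),
    (∀ cl ∈ cells, pvInG n cl) → InvB B n u d procd st →
    InvB B n u d (procd ++ cells) (cells.foldl (bCellStep B n u d) st) := by
  intro cells
  induction cells with
  | nil => intro st procd _ h; simpa using h
  | cons cell cells ih =>
    intro st procd hG hInv
    rw [List.foldl_cons]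
    have hGc : pvInG n cell := hG cell List.mem_cons_self
    have hres : InvB B n u d (procd ++ [cell]) (bCellStep B n u d st cell) := by
      by_cases hc : PySem.Set.contains st.1 cell = true
      · have hstep : bCellStep B n u d st cell = st := by
          unfold bCellStep; rw [hc]; simp
        rw [hstep]
        obtain ⟨reps, Ls, i1, i2, i3, i4, i5, i6, i7⟩ := hInv
        refine ⟨reps, Ls, i1, i2, i3, i4, i5, i6, ?_⟩
        intro cl hcl
        rcases List.mem_append.1 hcl with hcl | hcl
        · exact i7 cl hcl
        · rw [List.mem_singleton.1 hcl]
          exact (PySem.Set.contains_iff _ _).1 hc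
      · have hcomp : IsCompList B n u d cell
            (growB B n u d ((n * n).toNat + 1) (PySem.Set.ofList [cell]) [cell]) := by
          have h0 : PySem.Set.ofList [cell] = ([cell] : List (Int × Int)) := rfl
          rw [h0]
          apply growB_spec B n u d cell ((n * n).toNat + 1) [cell] [cell]
            (List.nodup_singleton cell) (fun x hx => hx)
            (fun x hx => by rw [List.mem_singleton.1 hx]; exact Relation.ReflTransGen.refl)
            List.mem_cons_self
            (fun x hx => by rw [List.mem_singleton.1 hx]; exact hGc)
            (fun x hx => Or.inr hx)
          refine Or.inr ?_
          have := List.length_filter_le (fun p => !decide (p ∈ ([cell] : List (Int × Int)))) (cellsL n)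
          rw [length_cellsL n hn] at this
          omega
        have hstep : bCellStep B n u d st cell =
            (PySem.Set.union st.1 (growB B n u d ((n * n).toNat + 1) (PySem.Set.ofList [cell]) [cell]),
             st.2 ++ [PySem.Set.len (growB B n u d ((n * n).toNat + 1) (PySem.Set.ofList [cell]) [cell])]) := by
          unfold bCellStep; rw [Bool.not_eq_true] at hc; rw [hc]; simp
        rw [hstep]
        obtain ⟨reps, Ls, i1, i2, i3, i4, i5, i6, i7⟩ := hInv
        set comp := growB B n u d ((n * n).toNat + 1) (PySem.Set.ofList [cell]) [cell] with hcompdef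
        have hmemc : cell ∈ comp := (hcomp.2 cell).2 Relation.ReflTransGen.refl
        have hnotin : cell ∉ st.1 := fun hmem => hc ((PySem.Set.contains_iff _ _).2 hmem)
        refine ⟨reps ++ [cell], Ls ++ [comp], PySem.Set.nodup_union _ _ i1, ?_, ?_, ?_, ?_, ?_, ?_⟩
        · exact List.rel_append i2 (List.forall₂_cons.2 ⟨hcomp, List.Forall₂.nil⟩)
        · intro r hr
          rcases List.mem_append.1 hr with hr | hr
          · exact i3 r hr
          · rw [List.mem_singleton.1 hr]; exact hGc
        · rw [List.pairwise_append]
          refine ⟨i4, List.pairwise_singleton _ _, ?_⟩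
          intro r hr s hs hreach
          rw [List.mem_singleton.1 hs] at hreach
          obtain ⟨L, hL, hLc⟩ := forall2_mem_left i2 hr
          have : cell ∈ L := (hLc.2 cell).2 hreach
          exact hnotin ((i6 cell).2 ⟨L, hL, this⟩)
        · simp [i5]
        · intro p
          rw [PySem.Set.mem_union]
          simp only [List.mem_append, List.mem_singleton]
          constructor
          · rintro (hp | hp)
            · obtain ⟨L, hL, hpL⟩ := (i6 p).1 hp
              exact ⟨L, Or.inl hL, hpL⟩
            · exact ⟨comp, Or.inr rfl, hp⟩
          · rintro ⟨L, hL | rfl, hpL⟩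
            · exact Or.inl ((i6 p).2 ⟨L, hL, hpL⟩)
            · exact Or.inr hpL
        · intro cl hcl
          rw [PySem.Set.mem_union]
          rcases List.mem_append.1 hcl with hcl | hcl
          · exact Or.inl (i7 cl hcl)
          · rw [List.mem_singleton.1 hcl]
            exact Or.inr hmemc
    have := ih (bCellStep B n u d st cell) (procd ++ [cell])
      (fun c hx => hG c (List.mem_cons_of_mem _ hx)) hres
    simpa using this

-- ---------- A-side: the visited matrix ----------

def VShape (n : Int) (v : List (List Bool)) : Prop :=
  v.length = n.toNat ∧ ∀ row ∈ v, row.length = n.toNat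

theorem vget_vset (n : Int) (v : List (List Bool)) (hsh : VShape n v) (p q : Int × Int)
    (hp : pvInG n p) (hq : pvInG n q) :
    pvVGet (pvVSet v p) q = if q = p then true else pvVGet v q := by
  obtain ⟨hp1, hp2, hp3, hp4⟩ := hp
  obtain ⟨hq1, hq2, hq3, hq4⟩ := hq
  have hlen := hsh.1
  have hplen : p.1.toNat < v.length := by omega
  have hqlen : q.1.toNat < v.length := by omega
  have hrowp : v[p.1.toNat].length = n.toNat := hsh.2 _ (List.getElem_mem hplen)
  have hrowq : v[q.1.toNat].length = n.toNat := hsh.2 _ (List.getElem_mem hqlen)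
  unfold pvVGet pvVSet
  rw [PySem.List.pyGetD_eq_getElem v [] hp1 (by omega),
      PySem.List.pySetD_of_nonneg v _ hp1, PySem.List.pySetD_of_nonneg _ _ hp3,
      PySem.List.pyGetD_eq_getElem (v.set p.1.toNat (v[p.1.toNat].set p.2.toNat true)) [] hq1
        (by simp [List.length_set]; omega),
      List.getElem_set]
  by_cases h1 : p.1.toNat = q.1.toNat
  · rw [if_pos h1,
        PySem.List.pyGetD_eq_getElem (v[p.1.toNat].set p.2.toNat true) false hq3
          (by simp [List.length_set, hrowp]; omega),
        List.getElem_set]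
    by_cases h2 : p.2.toNat = q.2.toNat
    · have hqp : q = p := Prod.ext (by omega) (by omega)
      rw [if_pos h2, if_pos hqp]
    · have hqp : ¬ (q = p) := fun h => h2 (by rw [h])
      rw [if_neg h2, if_neg hqp,
          PySem.List.pyGetD_eq_getElem v [] hq1 (by omega),
          PySem.List.pyGetD_eq_getElem (v[q.1.toNat]) false hq3 (by rw [hrowq]; omega)]
      simp only [h1]
  · have hqp : ¬ (q = p) := fun h => h1 (by rw [h])
    rw [if_neg h1, if_neg hqp,
        PySem.List.pyGetD_eq_getElem v [] hq1 (by omega),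
        PySem.List.pyGetD_eq_getElem (v[q.1.toNat]) false hq3 (by rw [hrowq]; omega)]

theorem vshape_vset (n : Int) (v : List (List Bool)) (hsh : VShape n v) (p : Int × Int)
    (hp : pvInG n p) : VShape n (pvVSet v p) := by
  obtain ⟨hp1, hp2, hp3, hp4⟩ := hp
  have hlen := hsh.1
  unfold pvVSet
  rw [PySem.List.pySetD_of_nonneg v _ hp1]
  constructor
  · simp [hsh.1]
  · intro row hrow
    rcases List.mem_or_eq_of_mem_set hrow with h | h
    · exact hsh.2 _ h
    · subst h
      rw [PySem.List.pySetD_of_nonneg _ _ hp3]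
      simp only [List.length_set]
      have hplen : p.1.toNat < v.length := by omega
      rw [PySem.List.pyGetD_eq_getElem v [] hp1 (by omega)]
      exact hsh.2 _ (List.getElem_mem hplen)

theorem vget_mono (n : Int) (v : List (List Bool)) (hsh : VShape n v) (p q : Int × Int)
    (hp : pvInG n p) (hq : pvInG n q) (h : pvVGet v q = true) :
    pvVGet (pvVSet v p) q = true := by
  rw [vget_vset n v hsh p q hp hq]
  split <;> simp [h]

theorem vshape_replicate (n : Int) :
    VShape n (List.replicate n.toNat (List.replicate n.toNat false)) := by
  constructor
  · simp
  · intro row hrow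
    rw [List.eq_of_mem_replicate hrow]; simp

theorem vget_replicate (n : Int) (p : Int × Int) :
    pvVGet (List.replicate n.toNat (List.replicate n.toNat false)) p = false := by
  unfold pvVGet
  have hrow : PySem.List.pyGetD (List.replicate n.toNat (List.replicate n.toNat false)) p.1 [] = [] ∨
      PySem.List.pyGetD (List.replicate n.toNat (List.replicate n.toNat false)) p.1 [] =
        List.replicate n.toNat false := by
    by_cases h : PySem.List.pyGet? (List.replicate n.toNat (List.replicate n.toNat false)) p.1 = none
    · exact Or.inl (PySem.List.pyGetD_of_none _ _ _ h)
    · have hin : PySem.Raise.InRange (List.replicate n.toNat (List.replicate n.toNat false)).length p.1 := by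
        by_contra hc
        exact h ((PySem.List.pyGet?_eq_none_iff _ _).2 hc)
      have := PySem.List.pyGetD_mem (xs := List.replicate n.toNat (List.replicate n.toNat false))
        (i := p.1) (d := []) hin
      exact Or.inr (List.eq_of_mem_replicate this)
  rcases hrow with h | h <;> rw [h]
  · have : PySem.List.pyGet? ([] : List Bool) p.2 = none := by
      rw [PySem.List.pyGet?_eq_none_iff]
      intro hc
      simp [PySem.Raise.InRange] at hc
      omega
    exact PySem.List.pyGetD_of_none _ _ _ this
  · by_cases h2 : PySem.List.pyGet? (List.replicate n.toNat false) p.2 = none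
    · exact PySem.List.pyGetD_of_none _ _ _ h2
    · have hin : PySem.Raise.InRange (List.replicate n.toNat false).length p.2 := by
        by_contra hc
        exact h2 ((PySem.List.pyGet?_eq_none_iff _ _).2 hc)
      exact List.eq_of_mem_replicate (PySem.List.pyGetD_mem (List.replicate n.toNat false) false hin)

def fCnt (n : Int) (v : List (List Bool)) : Nat :=
  ((cellsL n).filter (fun p => !pvVGet v p)).length

theorem fCnt_vset (n : Int) (v : List (List Bool)) (hsh : VShape n v) (p : Int × Int)
    (hp : pvInG n p) (hf : pvVGet v p = false) : fCnt n (pvVSet v p) + 1 = fCnt n v := by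
  unfold fCnt
  obtain ⟨s, t, hst⟩ := List.append_of_mem ((mem_cellsL n p).2 hp)
  have hnd := nodup_cellsL n
  rw [hst] at hnd
  have hps : p ∉ s := by
    intro hc
    exact (List.disjoint_of_nodup_append hnd) hc List.mem_cons_self
  have hpt : p ∉ t := by
    have := List.nodup_append.1 hnd
    have h2 := this.2.1
    rw [List.nodup_cons] at h2
    exact h2.1
  have hcongr : ∀ x ∈ cellsL n, x ≠ p → pvVGet (pvVSet v p) x = pvVGet v x := by
    intro x hx hne
    rw [vget_vset n v hsh p x hp ((mem_cellsL n x).1 hx), if_neg hne]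
  rw [hst]
  simp only [← List.countP_eq_length_filter, List.countP_append, List.countP_cons]
  have hs : List.countP (fun q => !pvVGet (pvVSet v p) q) s = List.countP (fun q => !pvVGet v q) s := by
    apply List.countP_congr
    intro x hx
    rw [hcongr x (by rw [hst]; exact List.mem_append_left _ hx)
      (fun hc => hps (hc ▸ hx))]
  have ht : List.countP (fun q => !pvVGet (pvVSet v p) q) t = List.countP (fun q => !pvVGet v q) t := by
    apply List.countP_congr
    intro x hx
    rw [hcongr x (by rw [hst]; exact List.mem_append_right _ (List.mem_cons_of_mem _ hx))
      (fun hc => hpt (hc ▸ hx))]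
  have hpv : pvVGet (pvVSet v p) p = true := by
    rw [vget_vset n v hsh p p hp hp, if_pos rfl]
  simp [hs, ht, hpv, hf]
  omega

-- ---------- A-side: the bfs dirs scan ----------

theorem aDirs_spec (B : List (List Int)) (n u d : Int) (cur : Int × Int) (hcur : pvInG n cur) :
    ∀ (ds : List (Int × Int)), (∀ di ∈ ds, di ∈ pvDirs) →
    ∀ (v : List (List Bool)) (q : List (Int × Int)), VShape n v →
    ∃ v' δ, ds.foldl (aStep B n u d cur) (v, q) = (v', q ++ δ) ∧ VShape n v' ∧
      (∀ x ∈ δ, pvAdj B n u d cur x) ∧ δ.Nodup ∧ (∀ x ∈ δ, pvVGet v x = false) ∧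
      (∀ y, pvInG n y → (pvVGet v' y = true ↔ (pvVGet v y = true ∨ y ∈ δ))) ∧
      (∀ di ∈ ds, moveable B n cur (cur.1 + di.1, cur.2 + di.2) u d = true →
        pvVGet v' (cur.1 + di.1, cur.2 + di.2) = true) ∧
      fCnt n v' + δ.length = fCnt n v := by
  intro ds
  induction ds with
  | nil =>
    intro _ v q hsh
    exact ⟨v, [], by simp, hsh, by simp, List.nodup_nil, by simp, by simp, by simp, by simp⟩
  | cons di ds ih =>
    intro hds v q hsh
    rw [List.foldl_cons]
    by_cases hcond : (moveable B n cur (cur.1 + di.1, cur.2 + di.2) u d &&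
        !pvVGet v (cur.1 + di.1, cur.2 + di.2)) = true
    · have hmv : moveable B n cur (cur.1 + di.1, cur.2 + di.2) u d = true := by
        simp at hcond; exact hcond.1
      have hvf : pvVGet v (cur.1 + di.1, cur.2 + di.2) = false := by
        simp at hcond; exact hcond.2
      have hnexG : pvInG n (cur.1 + di.1, cur.2 + di.2) :=
        ((moveable_true_iff B n u d cur _).1 hmv).1
      have hadj : pvAdj B n u d cur (cur.1 + di.1, cur.2 + di.2) :=
        (adj_iff B n u d _ hcur).2 ⟨di, hds di List.mem_cons_self, rfl, hmv⟩
      have hstep : aStep B n u d cur (v, q) di =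
          (pvVSet v (cur.1 + di.1, cur.2 + di.2), q ++ [(cur.1 + di.1, cur.2 + di.2)]) := by
        unfold aStep
        simp only [hcond, if_pos]
      rw [hstep]
      obtain ⟨v', δ', heq, hsh', hadj', hnd', hvf', hiff', hmvs', hcnt'⟩ :=
        ih (fun x hx => hds x (List.mem_cons_of_mem _ hx))
          (pvVSet v (cur.1 + di.1, cur.2 + di.2)) (q ++ [(cur.1 + di.1, cur.2 + di.2)])
          (vshape_vset n v hsh _ hnexG)
      have hvset_self : pvVGet (pvVSet v (cur.1 + di.1, cur.2 + di.2)) (cur.1 + di.1, cur.2 + di.2) = true := by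
        rw [vget_vset n v hsh _ _ hnexG hnexG, if_pos rfl]
      refine ⟨v', (cur.1 + di.1, cur.2 + di.2) :: δ', by rw [heq]; simp, hsh', ?_, ?_, ?_, ?_, ?_, ?_⟩
      · intro x hx
        rcases List.mem_cons.1 hx with rfl | hx
        · exact hadj
        · obtain ⟨h1, h2, h3, h4, h5⟩ := hadj' x hx
          exact ⟨h1, h2, h3, h4, h5⟩
      · rw [List.nodup_cons]
        refine ⟨?_, hnd'⟩
        intro hc
        have := hvf' _ hc
        rw [hvset_self] at this
        simp at this
      · intro x hx
        rcases List.mem_cons.1 hx with rfl | hx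
        · exact hvf
        · have hxf := hvf' x hx
          have hxG : pvInG n x := (hadj' x hx).2.1
          rw [vget_vset n v hsh _ _ hnexG hxG] at hxf
          by_cases hxe : x = (cur.1 + di.1, cur.2 + di.2)
          · rw [if_pos hxe] at hxf; exact absurd hxf (by simp)
          · rwa [if_neg hxe] at hxf
      · intro y hy
        rw [hiff' y hy, vget_vset n v hsh _ _ hnexG hy]
        by_cases hye : y = (cur.1 + di.1, cur.2 + di.2)
        · simp [hye]
        · rw [if_neg hye]
          simp [List.mem_cons, hye]
      · intro di' hdi' hmv'
        rcases List.mem_cons.1 hdi' with rfl | hdi'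
        · rw [hiff' _ hnexG]
          exact Or.inl hvset_self
        · exact hmvs' di' hdi' hmv'
      · have := fCnt_vset n v hsh _ hnexG hvf
        simp only [List.length_cons]
        omega
    · have hstep : aStep B n u d cur (v, q) di = (v, q) := by
        unfold aStep
        simp only [hcond]
        rfl
      rw [hstep]
      obtain ⟨v', δ', heq, hsh', hadj', hnd', hvf', hiff', hmvs', hcnt'⟩ :=
        ih (fun x hx => hds x (List.mem_cons_of_mem _ hx)) v q hsh
      refine ⟨v', δ', heq, hsh', hadj', hnd', hvf', hiff', ?_, hcnt'⟩
      intro di' hdi' hmv'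
      rcases List.mem_cons.1 hdi' with rfl | hdi'
      · have hvt : pvVGet v (cur.1 + di'.1, cur.2 + di'.2) = true := by
          simp [hmv'] at hcond
          exact hcond
        have hG : pvInG n (cur.1 + di'.1, cur.2 + di'.2) :=
          ((moveable_true_iff B n u d cur _).1 hmv').1
        rw [hiff' _ hG]
        exact Or.inl hvt
      · exact hmvs' di' hdi' hmv'

-- ---------- A-side: the bfs queue loop ----------

def InvA (B : List (List Int)) (n u d : Int) (Root : List (Int × Int))
    (q : List (Int × Int)) (v : List (List Bool)) (path : PySem.Set (Int × Int)) : Prop :=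
  VShape n v ∧ path.Nodup ∧
  (∀ p, (pvInG n p ∧ pvVGet v p = true) ↔ (p ∈ path ∨ p ∈ q)) ∧
  (∀ p, pvInG n p → pvVGet v p = true → ∃ r ∈ Root, pvReach B n u d r p) ∧
  (∀ r ∈ Root, pvInG n r ∧ pvVGet v r = true) ∧
  (∀ p, pvInG n p → pvVGet v p = true →
    (∀ z, pvAdj B n u d p z → pvVGet v z = true) ∨ p ∈ q)

theorem bfsLoop_spec (B : List (List Int)) (n u d : Int) (Root : List (Int × Int)) :
    ∀ (fuel : Nat) (q : List (Int × Int)) (v : List (List Bool)) (path : PySem.Set (Int × Int)),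
    InvA B n u d Root q v path → (q = [] ∨ 2 * fCnt n v + q.length ≤ fuel) →
    (∀ p, p ∈ (bfsLoop B n u d fuel q v path).1 ↔
        (pvInG n p ∧ pvVGet (bfsLoop B n u d fuel q v path).2 p = true)) ∧
    (bfsLoop B n u d fuel q v path).1.Nodup ∧ VShape n (bfsLoop B n u d fuel q v path).2 ∧
    (∀ p ∈ (bfsLoop B n u d fuel q v path).1, ∃ rt ∈ Root, pvReach B n u d rt p) ∧
    (∀ rt ∈ Root, rt ∈ (bfsLoop B n u d fuel q v path).1) ∧
    (∀ p ∈ (bfsLoop B n u d fuel q v path).1, ∀ z, pvAdj B n u d p z →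
        z ∈ (bfsLoop B n u d fuel q v path).1) ∧
    (∀ p ∈ path, p ∈ (bfsLoop B n u d fuel q v path).1) := by
  have base : ∀ (fuel : Nat) (v : List (List Bool)) (path : PySem.Set (Int × Int)),
      InvA B n u d Root [] v path →
      (∀ p, p ∈ path ↔ (pvInG n p ∧ pvVGet v p = true)) ∧ path.Nodup ∧ VShape n v ∧
      (∀ p ∈ path, ∃ rt ∈ Root, pvReach B n u d rt p) ∧ (∀ rt ∈ Root, rt ∈ path) ∧
      (∀ p ∈ path, ∀ z, pvAdj B n u d p z → z ∈ path) ∧ (∀ p ∈ path, p ∈ path) := by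
    intro fuel v path ⟨i1, i2, i3, i4, i5, i6⟩
    have hchar : ∀ p, p ∈ path ↔ (pvInG n p ∧ pvVGet v p = true) := by
      intro p
      rw [i3 p]
      simp
    refine ⟨hchar, i2, i1, ?_, ?_, ?_, fun p hp => hp⟩
    · intro p hp
      obtain ⟨hG, hv⟩ := (hchar p).1 hp
      exact i4 p hG hv
    · intro rt hrt
      exact (hchar rt).2 (i5 rt hrt)
    · intro p hp z hz
      obtain ⟨hG, hv⟩ := (hchar p).1 hp
      rcases i6 p hG hv with hcl | hq
      · exact (hchar z).2 ⟨hz.2.1, hcl z hz⟩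
      · cases hq
  intro fuel
  induction fuel with
  | zero =>
    intro q v path hInv hfuel
    have hq : q = [] := by
      rcases hfuel with h | h
      · exact h
      · cases q with
        | nil => rfl
        | cons a q' => exact absurd h (by simp)
    subst hq
    exact base 0 v path hInv
  | succ fuel ih =>
    intro q v path hInv hfuel
    match q with
    | [] => exact base (fuel + 1) v path hInv
    | cur :: q' =>
      obtain ⟨i1, i2, i3, i4, i5, i6⟩ := hInv
      have hcurIn : cur ∈ path ∨ cur ∈ cur :: q' := Or.inr List.mem_cons_self
      obtain ⟨hcurG, hcurV⟩ := (i3 cur).2 hcurIn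
      obtain ⟨v', δ, heq, hsh', hadj', hnd', hvf', hiff', hmvs', hcnt'⟩ :=
        aDirs_spec B n u d cur hcurG pvDirs (fun x hx => hx) v q' i1
      have hδG : ∀ x ∈ δ, pvInG n x := fun x hx => (hadj' x hx).2.1
      show (∀ p, p ∈ (bfsLoop B n u d (fuel+1) (cur::q') v path).1 ↔ _) ∧ _
      rw [bfsLoop, heq]
      simp only []
      have hmono : ∀ y, pvInG n y → pvVGet v y = true → pvVGet v' y = true := by
        intro y hy hv
        rw [hiff' y hy]
        exact Or.inl hv
      have hInv' : InvA B n u d Root (q' ++ δ) v' (PySem.Set.add path cur) := by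
        refine ⟨hsh', PySem.Set.nodup_add _ _ i2, ?_, ?_, ?_, ?_⟩
        · intro p
          constructor
          · rintro ⟨hG, hv⟩
            rw [hiff' p hG] at hv
            rcases hv with hv | hv
            · rcases (i3 p).1 ⟨hG, hv⟩ with hp | hp
              · exact Or.inl ((PySem.Set.mem_add _ _ _).2 (Or.inl hp))
              · rcases List.mem_cons.1 hp with rfl | hp
                · exact Or.inl ((PySem.Set.mem_add _ _ _).2 (Or.inr rfl))
                · exact Or.inr (List.mem_append_left _ hp)
            · exact Or.inr (List.mem_append_right _ hv)
          · intro hp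
            rcases hp with hp | hp
            · rcases (PySem.Set.mem_add _ _ _).1 hp with hp | rfl
              · obtain ⟨hG, hv⟩ := (i3 p).2 (Or.inl hp)
                exact ⟨hG, hmono p hG hv⟩
              · exact ⟨hcurG, hmono _ hcurG hcurV⟩
            · rcases List.mem_append.1 hp with hp | hp
              · obtain ⟨hG, hv⟩ := (i3 p).2 (Or.inr (List.mem_cons_of_mem _ hp))
                exact ⟨hG, hmono p hG hv⟩
              · refine ⟨hδG p hp, ?_⟩
                rw [hiff' p (hδG p hp)]
                exact Or.inr hp
        · intro p hG hv
          rw [hiff' p hG] at hv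
          rcases hv with hv | hv
          · exact i4 p hG hv
          · obtain ⟨r, hr, hreach⟩ := i4 cur hcurG hcurV
            exact ⟨r, hr, Relation.ReflTransGen.tail hreach (hadj' p hv)⟩
        · intro r hr
          obtain ⟨hG, hv⟩ := i5 r hr
          exact ⟨hG, hmono r hG hv⟩
        · intro p hG hv
          rw [hiff' p hG] at hv
          rcases hv with hv | hv
          · rcases i6 p hG hv with hcl | hq
            · refine Or.inl ?_
              intro z hz
              exact hmono z hz.2.1 (hcl z hz)
            · rcases List.mem_cons.1 hq with rfl | hq
              · refine Or.inl ?_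
                intro z hz
                obtain ⟨di, hdi, rfl, hmv⟩ := (adj_iff B n u d z hG).1 hz
                exact hmvs' di hdi hmv
              · exact Or.inr (List.mem_append_left _ hq)
          · exact Or.inr (List.mem_append_right _ hv)
      have hfuel' : q' ++ δ = [] ∨ 2 * fCnt n v' + (q' ++ δ).length ≤ fuel := by
        rcases hfuel with h | h
        · cases h
        · refine Or.inr ?_
          simp only [List.length_append, List.length_cons] at h ⊢
          omega
      obtain ⟨c1, c2, c3, c4, c5, c6, c7⟩ := ih (q' ++ δ) v' (PySem.Set.add path cur) hInv' hfuel'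
      exact ⟨c1, c2, c3, c4, c5, c6,
        fun p hp => c7 p ((PySem.Set.mem_add _ _ _).2 (Or.inl hp))⟩

-- ---------- A-side: the city loop over one combination ----------

theorem fCnt_le (n : Int) (hn : 0 ≤ n) (v : List (List Bool)) : fCnt n v ≤ (n * n).toNat := by
  have := List.length_filter_le (fun p => !pvVGet v p) (cellsL n)
  rw [length_cellsL n hn] at this
  exact this

def InvC (B : List (List Int)) (n u d : Int) (procd : List (Int × Int))
    (st : PySem.Set (Int × Int) × List (List Bool)) : Prop :=
  VShape n st.2 ∧ st.1.Nodup ∧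
  (∀ p, p ∈ st.1 ↔ (pvInG n p ∧ pvVGet st.2 p = true)) ∧
  (∀ p ∈ st.1, ∃ c ∈ procd, pvReach B n u d c p) ∧
  (∀ c ∈ procd, pvInG n c ∧ c ∈ st.1) ∧
  (∀ p ∈ st.1, ∀ z, pvAdj B n u d p z → z ∈ st.1)

theorem cityFold_inv (B : List (List Int)) (n u d : Int) (hn : 0 ≤ n) :
    ∀ (comb : List (Int × Int)) (st : PySem.Set (Int × Int) × List (List Bool))
      (procd : List (Int × Int)),
    (∀ c ∈ comb, pvInG n c) → InvC B n u d procd st →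
    InvC B n u d (procd ++ comb) (comb.foldl (cityStep B n u d) st) := by
  intro comb
  induction comb with
  | nil => intro st procd _ h; simpa using h
  | cons city comb ih =>
    intro st procd hG hInv
    rw [List.foldl_cons]
    have hGc : pvInG n city := hG city List.mem_cons_self
    obtain ⟨i1, i2, i3, i4, i5, i6⟩ := hInv
    have hres : InvC B n u d (procd ++ [city]) (cityStep B n u d st city) := by
      by_cases hc : pvVGet st.2 city = true
      · have hstep : cityStep B n u d st city = st := by
          unfold cityStep; rw [hc]; simp
        rw [hstep]
        refine ⟨i1, i2, i3, ?_, ?_, i6⟩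
        · intro p hp
          obtain ⟨c, hcp, hr⟩ := i4 p hp
          exact ⟨c, List.mem_append_left _ hcp, hr⟩
        · intro c hcp
          rcases List.mem_append.1 hcp with hcp | hcp
          · exact i5 c hcp
          · rw [List.mem_singleton.1 hcp]
            exact ⟨hGc, (i3 city).2 ⟨hGc, hc⟩⟩
      · have hstep : cityStep B n u d st city =
            pvBfs B n (pvVSet st.2 city) city st.1 u d := by
          unfold cityStep
          rw [Bool.not_eq_true] at hc
          rw [hc]
          simp
        rw [hstep]
        unfold pvBfs
        have hvc : pvVGet (pvVSet st.2 city) city = true := by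
          rw [vget_vset n st.2 i1 city city hGc hGc, if_pos rfl]
        have hsh' := vshape_vset n st.2 i1 city hGc
        have hmono : ∀ y, pvInG n y → pvVGet st.2 y = true → pvVGet (pvVSet st.2 city) y = true :=
          fun y hy hv => vget_mono n st.2 i1 city y hGc hy hv
        have hInvA : InvA B n u d (procd ++ [city]) [city] (pvVSet st.2 city) st.1 := by
          refine ⟨hsh', i2, ?_, ?_, ?_, ?_⟩
          · intro p
            constructor
            · rintro ⟨hpG, hpv⟩
              rw [vget_vset n st.2 i1 city p hGc hpG] at hpv
              by_cases hpe : p = city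
              · exact Or.inr (by rw [hpe]; exact List.mem_cons_self)
              · rw [if_neg hpe] at hpv
                exact Or.inl ((i3 p).2 ⟨hpG, hpv⟩)
            · intro hp
              rcases hp with hp | hp
              · obtain ⟨hpG, hpv⟩ := (i3 p).1 hp
                exact ⟨hpG, hmono p hpG hpv⟩
              · rw [List.mem_singleton.1 hp]
                exact ⟨hGc, hvc⟩
          · intro p hpG hpv
            rw [vget_vset n st.2 i1 city p hGc hpG] at hpv
            by_cases hpe : p = city
            · exact ⟨city, List.mem_append_right _ List.mem_cons_self,
                by rw [hpe]; exact Relation.ReflTransGen.refl⟩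
            · rw [if_neg hpe] at hpv
              obtain ⟨c, hcp, hr⟩ := i4 p ((i3 p).2 ⟨hpG, hpv⟩)
              exact ⟨c, List.mem_append_left _ hcp, hr⟩
          · intro r hr
            rcases List.mem_append.1 hr with hr | hr
            · obtain ⟨hrG, hrm⟩ := i5 r hr
              exact ⟨hrG, hmono r hrG ((i3 r).1 hrm).2⟩
            · rw [List.mem_singleton.1 hr]
              exact ⟨hGc, hvc⟩
          · intro p hpG hpv
            rw [vget_vset n st.2 i1 city p hGc hpG] at hpv
            by_cases hpe : p = city
            · exact Or.inr (by rw [hpe]; exact List.mem_cons_self)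
            · rw [if_neg hpe] at hpv
              refine Or.inl ?_
              intro z hz
              exact hmono z hz.2.1 ((i3 z).1 (i6 p ((i3 p).2 ⟨hpG, hpv⟩) z hz)).2
        have hfuel : ([city] : List (Int × Int)) = [] ∨
            2 * fCnt n (pvVSet st.2 city) + ([city] : List (Int × Int)).length ≤
              2 * (n * n).toNat + 2 := by
          refine Or.inr ?_
          have := fCnt_le n hn (pvVSet st.2 city)
          simp
          omega
        obtain ⟨c1, c2, c3, c4, c5, c6, c7⟩ :=
          bfsLoop_spec B n u d (procd ++ [city]) (2 * (n * n).toNat + 2) [city]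
            (pvVSet st.2 city) st.1 hInvA hfuel
        refine ⟨c3, c2, fun p => ⟨fun hp => (c1 p).1 hp, fun hp => (c1 p).2 hp⟩, c4, ?_, c6⟩
        intro c hcp
        rcases List.mem_append.1 hcp with hcp | hcp
        · exact ⟨(i5 c hcp).1, c7 c (i5 c hcp).2⟩
        · rw [List.mem_singleton.1 hcp]
          exact ⟨hGc, c5 city (List.mem_append_right _ List.mem_cons_self)⟩
    have := ih (cityStep B n u d st city) (procd ++ [city])
      (fun c hx => hG c (List.mem_cons_of_mem _ hx)) hres
    simpa using this

theorem pathChar (B : List (List Int)) (n u d : Int) (hn : 0 ≤ n) (comb : List (Int × Int))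
    (hG : ∀ c ∈ comb, pvInG n c) :
    (comb.foldl (cityStep B n u d)
        (([] : PySem.Set (Int × Int)), List.replicate n.toNat (List.replicate n.toNat false))).1.Nodup ∧
    (∀ p, p ∈ (comb.foldl (cityStep B n u d)
        (([] : PySem.Set (Int × Int)), List.replicate n.toNat (List.replicate n.toNat false))).1 ↔
      ∃ c ∈ comb, pvReach B n u d c p) := by
  have hInit : InvC B n u d []
      (([] : PySem.Set (Int × Int)), List.replicate n.toNat (List.replicate n.toNat false)) := by
    refine ⟨vshape_replicate n, List.nodup_nil, ?_, by simp, by simp, by simp⟩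
    intro p
    simp [vget_replicate n p]
  obtain ⟨i1, i2, i3, i4, i5, i6⟩ := cityFold_inv B n u d hn comb _ [] hG hInit
  simp only [List.nil_append] at i4 i5
  refine ⟨i2, ?_⟩
  intro p
  constructor
  · exact fun hp => i4 p hp
  · rintro ⟨c, hc, hr⟩
    exact reach_mem_of_closed B n u d (i5 c hc).2 i6 hr

-- ---------- A-side: cities, pick_city, ansLoop ----------

theorem citiesA_eq (n : Int) :
    (PySem.List.pyRange 0 n 1).foldl (fun acc i =>
      (PySem.List.pyRange 0 n 1).foldl (fun acc2 j => acc2 ++ [(i, j)]) acc) [] = cellsL n := by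
  unfold cellsL
  have h1 : ∀ (acc : List (Int × Int)) (i : Int),
      (PySem.List.pyRange 0 n 1).foldl (fun acc2 j => acc2 ++ [(i, j)]) acc =
        acc ++ (PySem.List.pyRange 0 n 1).map (fun j => (i, j)) :=
    fun acc i => PySem.List.foldl_append_singleton_eq_map _ _ _
  simp only [h1]
  have h2 := PySem.List.foldl_append_eq_flatMap
    (fun i => (PySem.List.pyRange 0 n 1).map (fun j => (i, j))) (PySem.List.pyRange 0 n 1) []
  simpa using h2

theorem pick_city_mem (cities : List (Int × Int)) (k : Int) :
    ∀ (m : Nat) (cur : Int) (picked : List (Int × Int)) (res : List (List (Int × Int)))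
      (x : List (Int × Int)),
    0 ≤ cur → m = (((cities.length : Int)) - cur).toNat →
    (x ∈ pick_city cities (cities.length : Int) k picked cur res ↔
      x ∈ res ∨ ∃ t, t.Sublist (cities.drop cur.toNat) ∧
        ((picked.length : Int) + (t.length : Int) = k) ∧ x = picked ++ t) := by
  intro m
  induction m using Nat.strong_induction_on with
  | _ m ih =>
    intro cur picked res x hcur hm
    rw [pick_city]
    by_cases h1 : k < (picked.length : Int)
    · rw [if_pos h1]
      constructor
      · exact Or.inl
      · rintro (hx | ⟨t, _, hlen, _⟩)
        · exact hx
        · exact absurd hlen (by omega)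
    · rw [if_neg h1]
      by_cases h2 : (picked.length : Int) = k
      · rw [if_pos h2]
        simp only [List.mem_append, List.mem_singleton]
        constructor
        · rintro (hx | rfl)
          · exact Or.inl hx
          · exact Or.inr ⟨[], List.nil_sublist _, by simpa using h2, by simp⟩
        · rintro (hx | ⟨t, hsub, hlen, rfl⟩)
          · exact Or.inl hx
          · have : t = [] := List.length_eq_zero_iff.1 (by omega)
            subst this
            exact Or.inr (by simp)
      · rw [if_neg h2]
        by_cases h3 : (cities.length : Int) ≤ cur
        · rw [if_pos h3]
          have hdrop : cities.drop cur.toNat = [] := List.drop_eq_nil_of_le (by omega)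
          constructor
          · exact Or.inl
          · rintro (hx | ⟨t, hsub, hlen, rfl⟩)
            · exact hx
            · rw [hdrop, List.sublist_nil] at hsub
              subst hsub
              exact absurd hlen (by simp; omega)
        · rw [if_neg h3]
          have hlt : cur < (cities.length : Int) := by omega
          have hltn : cur.toNat < cities.length := by omega
          have hget : PySem.List.pyGetD cities cur (0, 0) = cities[cur.toNat] :=
            PySem.List.pyGetD_eq_getElem cities (0, 0) hcur hlt
          have hm1 : (((cities.length : Int)) - (cur + 1)).toNat < m := by omega
          have hdrop : cities.drop cur.toNat = cities[cur.toNat] :: cities.drop (cur.toNat + 1) :=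
            List.drop_eq_getElem_cons hltn
          have hnat : (cur + 1).toNat = cur.toNat + 1 := by omega
          rw [ih _ hm1 (cur + 1) picked _ x (by omega) rfl,
              ih _ hm1 (cur + 1) (picked ++ [PySem.List.pyGetD cities cur (0, 0)]) res x (by omega) rfl]
          rw [hget, hdrop, hnat]
          constructor
          · rintro ((hx | ⟨t, hsub, hlen, rfl⟩) | ⟨t, hsub, hlen, rfl⟩)
            · exact Or.inl hx
            · refine Or.inr ⟨cities[cur.toNat] :: t, ?_, ?_, by simp⟩
              · rw [List.sublist_cons_iff]
                exact Or.inr ⟨t, rfl, hsub⟩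
              · simp at hlen ⊢
                omega
            · refine Or.inr ⟨t, ?_, by omega, rfl⟩
              rw [List.sublist_cons_iff]
              exact Or.inl hsub
          · rintro (hx | ⟨t, hsub, hlen, rfl⟩)
            · exact Or.inl (Or.inl hx)
            · rw [List.sublist_cons_iff] at hsub
              rcases hsub with hsub | ⟨r, rfl, hr⟩
              · exact Or.inr ⟨t, hsub, by omega, rfl⟩
              · refine Or.inl (Or.inr ⟨r, hr, ?_, by simp⟩)
                simp at hlen ⊢
                omega

-- the value A computes for one combination
def FComb (B : List (List Int)) (n u d : Int) (comb : List (Int × Int)) : Int :=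
  PySem.Set.len (comb.foldl (cityStep B n u d)
    (([] : PySem.Set (Int × Int)), List.replicate n.toNat (List.replicate n.toNat false))).1

theorem foldl_max_const (F : List (Int × Int) → Int) :
    ∀ (res : List (List (Int × Int))) (a : Int), (∀ c ∈ res, F c ≤ a) →
    res.foldl (fun x c => max x (F c)) a = a := by
  intro res
  induction res with
  | nil => intro a _; rfl
  | cons c res ih =>
    intro a h
    rw [List.foldl_cons, max_eq_left (h c List.mem_cons_self)]
    exact ih a (fun c' hc' => h c' (List.mem_cons_of_mem _ hc'))

theorem ansLoop_eq_foldl (B : List (List Int)) (n u d : Int) :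
    ∀ (res : List (List (Int × Int))) (ans : Int),
    (∀ comb ∈ res, FComb B n u d comb ≤ n ^ 2) →
    ansLoop B n u d res ans = res.foldl (fun a comb => max a (FComb B n u d comb)) ans := by
  intro res
  induction res with
  | nil => intro ans _; rfl
  | cons comb res ih =>
    intro ans hb
    simp only [ansLoop]
    rw [List.foldl_cons]
    have hF : PySem.Set.len (comb.foldl (cityStep B n u d)
        (([] : PySem.Set (Int × Int)), List.replicate n.toNat (List.replicate n.toNat false))).1 =
        FComb B n u d comb := rfl
    rw [hF]
    by_cases he : max ans (FComb B n u d comb) = n ^ 2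
    · rw [he, if_pos rfl,
        foldl_max_const (FComb B n u d) res (n ^ 2) (fun c hc => hb c (List.mem_cons_of_mem _ hc))]
    · rw [if_neg he]
      exact ih _ (fun c hc => hb c (List.mem_cons_of_mem _ hc))

-- ---------- top-k sum lemmas ----------

theorem take_succ_sum_le (a : Int) :
    ∀ (s : List Int), (∀ x ∈ s, x ≤ a) → 0 ≤ a →
    ∀ k : Nat, (s.take (k + 1)).sum ≤ a + (s.take k).sum := by
  intro s
  induction s with
  | nil => intro _ ha k; simpa using ha
  | cons b s ih =>
    intro h ha k
    cases k with
    | zero =>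
      simpa using h b List.mem_cons_self
    | succ j =>
      simp only [List.take_succ_cons, List.sum_cons]
      have := ih (fun x hx => h x (List.mem_cons_of_mem _ hx)) ha j
      omega

theorem sublist_sum_le_take :
    ∀ {t s : List Int}, t.Sublist s → s.Pairwise (fun a b => b ≤ a) → (∀ x ∈ s, 0 ≤ x) →
    ∀ k : Nat, t.length ≤ k → t.sum ≤ (s.take k).sum := by
  intro t s h
  induction h with
  | slnil => intro _ _ k _; simp
  | @cons t s a h ihh =>
    intro hpw hnn k hk
    have hle := ihh (List.Pairwise.sublist (List.sublist_cons_self a s) hpw)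
      (fun x hx => hnn x (List.mem_cons_of_mem _ hx)) k hk
    cases k with
    | zero =>
      have : t = [] := List.length_eq_zero_iff.1 (by omega)
      subst this; simp
    | succ j =>
      refine le_trans hle ?_
      simp only [List.take_succ_cons, List.sum_cons]
      have hb : ∀ x ∈ s, x ≤ a := fun x hx => (List.pairwise_cons.1 hpw).1 x hx
      have ha : 0 ≤ a := hnn a List.mem_cons_self
      have := take_succ_sum_le a s hb ha j
      omega
  | @cons₂ t s a h ihh =>
    intro hpw hnn k hk
    cases k with
    | zero => simp at hk
    | succ j =>
      simp only [List.take_succ_cons, List.sum_cons]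
      have := ihh (List.pairwise_cons.1 hpw).2
        (fun x hx => hnn x (List.mem_cons_of_mem _ hx)) j (by simpa using hk)
      omega

theorem subperm_sum_le_take (t sizes : List Int) (hsub : t.Subperm sizes)
    (hnn : ∀ x ∈ sizes, 0 ≤ x) (k : Nat) (hk : t.length ≤ k) :
    t.sum ≤ ((PySem.List.sorted sizes (fun x => x) true).take k).sum := by
  have hperm : (PySem.List.sorted sizes (fun x => x) true).Perm sizes :=
    PySem.List.sorted_perm sizes (fun x => x) true
  have hsub2 : t.Subperm (PySem.List.sorted sizes (fun x => x) true) :=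
    hsub.trans hperm.symm.subperm
  obtain ⟨t', hpt, hst⟩ := hsub2
  have hpw : (PySem.List.sorted sizes (fun x => x) true).Pairwise (fun a b => b ≤ a) := by
    have := PySem.List.sorted_pairwise_rev sizes (fun x => x)
    simpa using this
  have hnn' : ∀ x ∈ PySem.List.sorted sizes (fun x => x) true, 0 ≤ x :=
    fun x hx => hnn x (hperm.mem_iff.1 hx)
  calc t.sum = t'.sum := (hpt.sum_eq).symm
    _ ≤ _ := sublist_sum_le_take hst hpw hnn' k (by rw [hpt.length_eq]; exact hk)

-- ---------- assorted helpers ----------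

theorem zip_forall2_mem {α β : Type} {R : α → β → Prop} :
    ∀ {l₁ : List α} {l₂ : List β}, List.Forall₂ R l₁ l₂ → ∀ p ∈ l₁.zip l₂, R p.1 p.2 := by
  intro l₁ l₂ h
  induction h with
  | nil => intro p hp; cases hp
  | cons hr _ ih =>
    intro p hp
    rcases List.mem_cons.1 hp with rfl | hp
    · exact hr
    · exact ih p hp

theorem forall2_zip_mem_right {α β : Type} {R : α → β → Prop} :
    ∀ {l₁ : List α} {l₂ : List β}, List.Forall₂ R l₁ l₂ →
    ∀ b ∈ l₂, ∃ a, (a, b) ∈ l₁.zip l₂ ∧ R a b := by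
  intro l₁ l₂ h
  induction h with
  | nil => intro b hb; cases hb
  | cons hr _ ih =>
    intro b hb
    rcases List.mem_cons.1 hb with rfl | hb
    · exact ⟨_, List.mem_cons_self, hr⟩
    · obtain ⟨a, ha, hRa⟩ := ih b hb
      exact ⟨a, List.mem_cons_of_mem _ ha, hRa⟩

theorem forall2_pairwise_zip {α β : Type} {R : α → β → Prop} {P : α → α → Prop}
    {Q : α × β → α × β → Prop}
    (hQ : ∀ a b a' b', R a b → R a' b' → P a a' → Q (a, b) (a', b')) :
    ∀ {l₁ : List α} {l₂ : List β}, List.Forall₂ R l₁ l₂ → l₁.Pairwise P →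
    (l₁.zip l₂).Pairwise Q := by
  intro l₁ l₂ h
  induction h with
  | nil => intro _; exact List.Pairwise.nil
  | @cons a b l₁ l₂ hr hf ih =>
    intro hpw
    rw [List.zip_cons_cons, List.pairwise_cons]
    refine ⟨?_, ih (List.pairwise_cons.1 hpw).2⟩
    intro p hp
    have hR2 := zip_forall2_mem hf p hp
    have hmem : p.1 ∈ l₁ := (List.of_mem_zip hp).1
    have := hQ a b p.1 p.2 hr hR2 ((List.pairwise_cons.1 hpw).1 p.1 hmem)
    exact this

theorem cast_sum_lengths :
    ∀ (L : List (List (Int × Int))),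
    ((L.map List.length).sum : Int) = (L.map (fun l => (l.length : Int))).sum := by
  intro L
  induction L with
  | nil => simp
  | cons l L ih => simp [ih]

theorem filter_mem_perm (l S : List (Int × Int)) (hl : l.Nodup) (hS : S.Nodup)
    (hsub : ∀ x ∈ S, x ∈ l) :
    (l.filter (fun x => decide (x ∈ S))).Perm S := by
  refine (List.perm_ext_iff_of_nodup (hl.filter _) hS).2 ?_
  intro x
  simp only [List.mem_filter, decide_eq_true_eq]
  exact ⟨fun h => h.2, fun h => ⟨hsub x h, h⟩⟩

theorem filter_not_mem_length (l S : List (Int × Int)) (hl : l.Nodup) (hS : S.Nodup)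
    (hsub : ∀ x ∈ S, x ∈ l) :
    (l.filter (fun x => !decide (x ∈ S))).length = l.length - S.length := by
  have hperm := List.filter_append_perm (fun x => decide (x ∈ S)) l
  have h1 : (l.filter (fun x => decide (x ∈ S))).length = S.length :=
    (filter_mem_perm l S hl hS hsub).length_eq
  have h2 := hperm.length_eq
  simp only [List.length_append] at h2
  omega

theorem length_le_sum_map {γ : Type} (l : List γ) (g : γ → Nat)
    (h : ∀ x ∈ l, 1 ≤ g x) : l.length ≤ (l.map g).sum := by
  induction l with
  | nil => simp
  | cons x l ih =>
    simp only [List.length_cons, List.map_cons, List.sum_cons]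
    have := ih (fun y hy => h y (List.mem_cons_of_mem _ hy))
    have := h x List.mem_cons_self
    omega

-- ---------- assembling both sides ----------

theorem bOuter_eq (B : List (List Int)) (n u d : Int) (st0 : PySem.Set (Int × Int) × List Int) :
    (PySem.List.pyRange 0 n 1).foldl (fun st i =>
      (PySem.List.pyRange 0 n 1).foldl (fun st2 j => bCellStep B n u d st2 (i, j)) st) st0 =
    (cellsL n).foldl (bCellStep B n u d) st0 := by
  unfold cellsL
  rw [List.foldl_flatMap]
  simp only [List.foldl_map]

theorem main_eq (B : List (List Int)) (n u d k : Int) (hn : 0 ≤ n) (hk1 : 1 ≤ k)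
    (hk2 : k ≤ n * n) : solution B n k u d = solution_alt B n k u d := by
  -- B-side: components
  have hInit : InvB B n u d [] ((PySem.Set.empty : PySem.Set (Int × Int)), ([] : List Int)) :=
    ⟨[], [], List.nodup_nil, List.Forall₂.nil, by simp, List.Pairwise.nil, by simp, by simp, by simp⟩
  obtain ⟨reps, Ls, i1, i2, i3, i4, i5, i6, i7⟩ :=
    bCells_inv B n u d hn (cellsL n) ((PySem.Set.empty : PySem.Set (Int × Int)), ([] : List Int)) []
      (fun cl hcl => (mem_cellsL n cl).1 hcl) hInit
  rw [List.nil_append] at i7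
  set stB := (cellsL n).foldl (bCellStep B n u d)
    ((PySem.Set.empty : PySem.Set (Int × Int)), ([] : List Int)) with hstB
  set prs := reps.zip Ls with hprs
  have hlen : reps.length = Ls.length := i2.length_eq
  have hRmem : ∀ p ∈ prs, IsCompList B n u d p.1 p.2 := fun p hp => zip_forall2_mem i2 p hp
  have hsizes : stB.2 = prs.map (fun rl => ((rl.2.length : Nat) : Int)) := by
    rw [i5, ← List.map_snd_zip (le_of_eq hlen.symm), List.map_map]
    rfl
  have hnnn : ∀ x ∈ stB.2, 0 ≤ x := by
    rw [hsizes]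
    intro x hx
    obtain ⟨rl, _, rfl⟩ := List.mem_map.1 hx
    exact Int.natCast_nonneg _
  have hPD : prs.Pairwise (fun a b => ∀ x ∈ a.2, x ∉ b.2) :=
    forall2_pairwise_zip (R := IsCompList B n u d)
      (P := fun r s => ¬ pvReach B n u d r s) (Q := fun a b => ∀ x ∈ a.2, x ∉ b.2)
      (fun a b a' b' hR hR' hP => compList_disjoint B n u d hR hR' hP) i2 i4
  have hrepsnd : reps.Nodup := by
    refine List.Pairwise.imp ?_ i4
    intro a b h he
    exact h (he ▸ Relation.ReflTransGen.refl)
  have hprsnd : prs.Nodup := by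
    refine List.Nodup.of_map Prod.fst ?_
    rw [List.map_fst_zip (le_of_eq hlen)]
    exact hrepsnd
  have hcov : ∀ c, pvInG n c → ∃ rl ∈ prs, c ∈ rl.2 := by
    intro c hc
    obtain ⟨L, hL, hcL⟩ := (i6 c).1 (i7 c ((mem_cellsL n c).2 hc))
    obtain ⟨r, hrz, _⟩ := forall2_zip_mem_right i2 L hL
    exact ⟨(r, L), hrz, hcL⟩
  -- the value B returns
  set srt := PySem.List.sorted stB.2 (fun x => x) true with hsrt
  set topk := (srt.take k.toNat).sum with htopk
  have hBval : solution_alt B n k u d = topk := by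
    have hguard : (decide (k ≤ 0) || decide (n * n < k)) = false := by
      simp
      omega
    show (if (decide (k ≤ 0) || decide (n * n < k)) = true then (0 : Int) else _) = _
    rw [hguard]
    simp only [Bool.false_eq_true, if_false]
    rw [bOuter_eq B n u d]
    rw [← hstB, ← hsrt, PySem.List.slice_to srt (by omega), ← htopk]
  -- A-side: the list of combinations
  have hc2 : (n : Int) ^ 2 = ((cellsL n).length : Int) := by
    rw [length_cellsL n hn, Int.toNat_of_nonneg (mul_nonneg hn hn), pow_two]
  have hresmem : ∀ x, x ∈ pick_city (cellsL n) ((cellsL n).length : Int) k [] 0 [] ↔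
      ∃ t, t.Sublist (cellsL n) ∧ ((t.length : Int) = k) ∧ x = t := by
    intro x
    rw [pick_city_mem (cellsL n) k (((cellsL n).length : Int) - 0).toNat 0 [] [] x le_rfl rfl]
    simp
  -- characterisation of A's value on one combination
  have hcomb_val : ∀ comb, comb.Sublist (cellsL n) → (comb.length : Int) = k →
      FComb B n u d comb ≤ topk ∧ FComb B n u d comb ≤ n ^ 2 := by
    intro comb hsub hlen_k
    have hcombG : ∀ c ∈ comb, pvInG n c := fun c hc => (mem_cellsL n c).1 (hsub.subset hc)
    have hcombnd : comb.Nodup := List.Nodup.sublist hsub (nodup_cellsL n)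
    obtain ⟨hpnd, hpmem⟩ := pathChar B n u d hn comb hcombG
    set path := (comb.foldl (cityStep B n u d)
      (([] : PySem.Set (Int × Int)), List.replicate n.toNat (List.replicate n.toNat false))).1
      with hpath
    have hF : FComb B n u d comb = (path.length : Int) := by
      rw [FComb, setLen_eq, hpath]
    have hpathG : ∀ p ∈ path, pvInG n p := by
      intro p hp
      obtain ⟨c, hc, hr⟩ := (hpmem p).1 hp
      exact pvReach_inG B n u d (hcombG c hc) hr
    have hb2 : FComb B n u d comb ≤ n ^ 2 := by
      have hsp : path.Subperm (cellsL n) :=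
        List.Nodup.subperm hpnd (fun p hp => (mem_cellsL n p).2 (hpathG p hp))
      have hl := hsp.length_le
      rw [length_cellsL n hn] at hl
      rw [hF, pow_two]
      omega
    refine ⟨?_, hb2⟩
    set hit := prs.filter (fun rl => comb.any (fun c => decide (c ∈ rl.2))) with hhit
    have hhit_sub : hit.Sublist prs := List.filter_sublist
    have hhitPD := List.Pairwise.sublist hhit_sub hPD
    have hflat_nodup : (hit.map Prod.snd).flatten.Nodup := by
      rw [List.nodup_flatten]
      constructor
      · intro L hL
        obtain ⟨rl, hrl, rfl⟩ := List.mem_map.1 hL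
        exact (hRmem rl (hhit_sub.subset hrl)).1
      · refine List.Pairwise.map _ ?_ hhitPD
        intro a b hab x hx hx'
        exact hab x hx hx'
    have hmem_flat : ∀ p, p ∈ (hit.map Prod.snd).flatten ↔ p ∈ path := by
      intro p
      rw [List.mem_flatten]
      constructor
      · rintro ⟨L, hL, hpL⟩
        obtain ⟨rl, hrl, rfl⟩ := List.mem_map.1 hL
        have hcomp := hRmem rl (hhit_sub.subset hrl)
        have hcond := (List.mem_filter.1 hrl).2
        obtain ⟨c, hc, hcin⟩ : ∃ c ∈ comb, c ∈ rl.2 := by simpa using hcond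
        have h1 : pvReach B n u d rl.1 c := (hcomp.2 c).1 hcin
        have h2 : pvReach B n u d rl.1 p := (hcomp.2 p).1 hpL
        exact (hpmem p).2 ⟨c, hc, pvReach_trans B n u d (pvReach_symm B n u d h1) h2⟩
      · intro hp
        obtain ⟨c, hc, hr⟩ := (hpmem p).1 hp
        obtain ⟨rl, hrl, hcin⟩ := hcov c (hcombG c hc)
        have hcomp := hRmem rl hrl
        have hpin : p ∈ rl.2 :=
          (hcomp.2 p).2 (pvReach_trans B n u d ((hcomp.2 c).1 hcin) hr)
        refine ⟨rl.2, List.mem_map_of_mem ?_, hpin⟩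
        rw [hhit, List.mem_filter]
        refine ⟨hrl, ?_⟩
        simp only [List.any_eq_true, decide_eq_true_eq]
        exact ⟨c, hc, hcin⟩
    have hperm : (hit.map Prod.snd).flatten.Perm path :=
      (List.perm_ext_iff_of_nodup hflat_nodup hpnd).2 hmem_flat
    have hhit_le : hit.length ≤ k.toNat := by
      have hWnodup : (hit.map (fun rl =>
          rl.2.filter (fun c => decide (c ∈ comb)))).flatten.Nodup := by
        rw [List.nodup_flatten]
        constructor
        · intro L hL
          obtain ⟨rl, hrl, rfl⟩ := List.mem_map.1 hL
          exact ((hRmem rl (hhit_sub.subset hrl)).1).filter _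
        · refine List.Pairwise.map _ ?_ hhitPD
          intro a b hab x hx hx'
          exact hab x (List.mem_of_mem_filter hx) (List.mem_of_mem_filter hx')
      have hWsub : ∀ x ∈ (hit.map (fun rl =>
          rl.2.filter (fun c => decide (c ∈ comb)))).flatten, x ∈ comb := by
        intro x hx
        rw [List.mem_flatten] at hx
        obtain ⟨L, hL, hxL⟩ := hx
        obtain ⟨rl, hrl, rfl⟩ := List.mem_map.1 hL
        have := (List.mem_filter.1 hxL).2
        simpa using this
      have hWlen : (hit.map (fun rl =>
          rl.2.filter (fun c => decide (c ∈ comb)))).flatten.length ≤ comb.length :=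
        (List.Nodup.subperm hWnodup hWsub).length_le
      have hWge : hit.length ≤ (hit.map (fun rl =>
          rl.2.filter (fun c => decide (c ∈ comb)))).flatten.length := by
        rw [List.length_flatten, List.map_map]
        refine length_le_sum_map hit _ ?_
        intro rl hrl
        have hcond := (List.mem_filter.1 hrl).2
        obtain ⟨c, hc, hcin⟩ : ∃ c ∈ comb, c ∈ rl.2 := by simpa using hcond
        have hcf : c ∈ rl.2.filter (fun c => decide (c ∈ comb)) :=
          List.mem_filter.2 ⟨hcin, by simpa using hc⟩
        exact List.length_pos_of_mem hcf
      omega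
    have hsizes_sub : (hit.map (fun rl => ((rl.2.length : Nat) : Int))).Sublist stB.2 := by
      rw [hsizes]
      exact List.Sublist.map _ hhit_sub
    have hsum : FComb B n u d comb = (hit.map (fun rl => ((rl.2.length : Nat) : Int))).sum := by
      rw [hF, ← hperm.length_eq, List.length_flatten, List.map_map]
      have := cast_sum_lengths (hit.map Prod.snd)
      simp only [List.map_map] at this
      simpa [Function.comp] using this
    rw [hsum]
    refine subperm_sum_le_take _ stB.2 hsizes_sub.subperm hnnn k.toNat ?_
    rw [List.length_map]
    exact hhit_le
  have hachieve : ∃ comb, comb.Sublist (cellsL n) ∧ ((comb.length : Int) = k) ∧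
      topk ≤ FComb B n u d comb := by
    have hsrt_perm : srt.Perm stB.2 := PySem.List.sorted_perm _ _ _
    have htk_sub : (srt.take k.toNat).Subperm
        (prs.map (fun rl => ((rl.2.length : Nat) : Int))) := by
      refine List.Subperm.trans (List.Sublist.subperm (List.take_sublist _ _)) ?_
      rw [← hsizes]
      exact hsrt_perm.subperm
    obtain ⟨t', hpt', hst'⟩ := htk_sub
    obtain ⟨P, hPsub, hPt⟩ := List.sublist_map_iff.1 hst'
    set C := P.map Prod.fst with hC
    have hPnd : P.Nodup := List.Nodup.sublist hPsub hprsnd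
    have hCsub : C.Sublist reps := by
      rw [hC]
      have := List.Sublist.map Prod.fst hPsub
      rwa [show prs.map Prod.fst = reps from List.map_fst_zip (le_of_eq hlen)] at this
    have hCnd : C.Nodup := List.Nodup.sublist hCsub hrepsnd
    have hCG : ∀ c ∈ C, pvInG n c := fun c hc => i3 c (hCsub.subset hc)
    have hCle : C.length ≤ k.toNat := by
      have h1 : t'.length = P.length := by rw [hPt, List.length_map]
      have h2 := hpt'.length_eq
      have h3 : (srt.take k.toNat).length ≤ k.toNat := by
        rw [List.length_take]
        omega
      rw [hC, List.length_map]
      omega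
    set pad := ((cellsL n).filter (fun c => !decide (c ∈ C))).take (k.toNat - C.length) with hpad
    have hpad_sub : pad.Sublist ((cellsL n).filter (fun c => !decide (c ∈ C))) :=
      List.take_sublist _ _
    have hpad_nd : pad.Nodup := List.Nodup.sublist hpad_sub ((nodup_cellsL n).filter _)
    have hpad_mem : ∀ x ∈ pad, x ∈ cellsL n ∧ x ∉ C := by
      intro x hx
      have hmem := hpad_sub.subset hx
      refine ⟨List.mem_of_mem_filter hmem, ?_⟩
      have h2 := (List.mem_filter.1 hmem).2
      simpa using h2
    have hfil_len : ((cellsL n).filter (fun c => !decide (c ∈ C))).length =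
        (n * n).toNat - C.length := by
      rw [filter_not_mem_length (cellsL n) C (nodup_cellsL n) hCnd
        (fun x hx => (mem_cellsL n x).2 (hCG x hx)), length_cellsL n hn]
    have hpad_len : pad.length = k.toNat - C.length := by
      rw [hpad, List.length_take, hfil_len]
      omega
    set S := C ++ pad with hS
    have hSnd : S.Nodup := by
      rw [hS, List.nodup_append]
      refine ⟨hCnd, hpad_nd, ?_⟩
      intro x hx y hy heq
      exact (hpad_mem y hy).2 (heq ▸ hx)
    have hSsub : ∀ x ∈ S, x ∈ cellsL n := by
      intro x hx
      rcases List.mem_append.1 hx with hx | hx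
      · exact (mem_cellsL n x).2 (hCG x hx)
      · exact (hpad_mem x hx).1
    have hSlen : S.length = k.toNat := by
      rw [hS, List.length_append, hpad_len]
      omega
    set comb := (cellsL n).filter (fun c => decide (c ∈ S)) with hcombdef
    have hcomb_sub : comb.Sublist (cellsL n) := List.filter_sublist
    have hcomb_perm : comb.Perm S := filter_mem_perm (cellsL n) S (nodup_cellsL n) hSnd hSsub
    have hcomb_len : (comb.length : Int) = k := by
      rw [hcomb_perm.length_eq, hSlen]
      omega
    refine ⟨comb, hcomb_sub, hcomb_len, ?_⟩
    obtain ⟨hpnd, hpmem⟩ := pathChar B n u d hn comb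
      (fun c hc => (mem_cellsL n c).1 (hcomb_sub.subset hc))
    set path := (comb.foldl (cityStep B n u d)
      (([] : PySem.Set (Int × Int)), List.replicate n.toNat (List.replicate n.toNat false))).1
      with hpath
    have hF : FComb B n u d comb = (path.length : Int) := by
      rw [FComb, setLen_eq, hpath]
    have hPD_P := List.Pairwise.sublist hPsub hPD
    have hflat_nd : (P.map Prod.snd).flatten.Nodup := by
      rw [List.nodup_flatten]
      constructor
      · intro L hL
        obtain ⟨rl, hrl, rfl⟩ := List.mem_map.1 hL
        exact (hRmem rl (hPsub.subset hrl)).1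
      · refine List.Pairwise.map _ ?_ hPD_P
        intro a b hab x hx hx'
        exact hab x hx hx'
    have hflat_sub : ∀ x ∈ (P.map Prod.snd).flatten, x ∈ path := by
      intro x hx
      rw [List.mem_flatten] at hx
      obtain ⟨L, hL, hxL⟩ := hx
      obtain ⟨rl, hrl, rfl⟩ := List.mem_map.1 hL
      have hcomp := hRmem rl (hPsub.subset hrl)
      have hr1 : rl.1 ∈ S := List.mem_append_left _ (List.mem_map_of_mem hrl)
      have hr1c : rl.1 ∈ comb := hcomb_perm.mem_iff.2 hr1
      exact (hpmem x).2 ⟨rl.1, hr1c, (hcomp.2 x).1 hxL⟩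
    have hflat_len : (P.map Prod.snd).flatten.length ≤ path.length :=
      (List.Nodup.subperm hflat_nd hflat_sub).length_le
    have htpk : topk = (P.map (fun rl => ((rl.2.length : Nat) : Int))).sum := by
      calc topk = t'.sum := (hpt'.sum_eq).symm
        _ = _ := by rw [hPt]
    have hcast : (P.map (fun rl => ((rl.2.length : Nat) : Int))).sum =
        ((P.map Prod.snd).flatten.length : Int) := by
      rw [List.length_flatten, List.map_map]
      have h2 := cast_sum_lengths (P.map Prod.snd)
      simp only [List.map_map] at h2
      simpa [Function.comp] using h2.symm
    rw [hF, htpk, hcast]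
    exact_mod_cast hflat_len
  -- assemble
  have htopk_nn : 0 ≤ topk := by
    rw [htopk]
    refine List.sum_nonneg ?_
    intro x hx
    have hx2 : x ∈ srt := List.mem_of_mem_take hx
    exact hnnn x ((PySem.List.sorted_perm stB.2 (fun x => x) true).mem_iff.1 hx2)
  have hAval : solution B n k u d =
      (pick_city (cellsL n) ((cellsL n).length : Int) k [] 0 []).foldl
        (fun a comb => max a (FComb B n u d comb)) 0 := by
    show ansLoop B n u d (pick_city _ ((n : Int) ^ 2) k [] 0 []) 0 = _
    rw [citiesA_eq n, hc2]
    refine ansLoop_eq_foldl B n u d _ 0 ?_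
    intro comb hcomb
    obtain ⟨t, hts, htl, rfl⟩ := (hresmem comb).1 hcomb
    exact (hcomb_val _ hts htl).2
  rw [hAval, hBval]
  set res := pick_city (cellsL n) ((cellsL n).length : Int) k [] 0 [] with hres
  have hub : res.foldl (fun a comb => max a (FComb B n u d comb)) 0 ≤ topk := by
    have : ∀ (l : List (List (Int × Int))) (a : Int), a ≤ topk →
        (∀ c ∈ l, FComb B n u d c ≤ topk) →
        l.foldl (fun a comb => max a (FComb B n u d comb)) a ≤ topk := by
      intro l
      induction l with
      | nil => intro a ha _; exact ha
      | cons c l ih =>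
        intro a ha hl
        rw [List.foldl_cons]
        exact ih _ (max_le ha (hl c List.mem_cons_self))
          (fun c' hc' => hl c' (List.mem_cons_of_mem _ hc'))
    refine this res 0 htopk_nn ?_
    intro c hc
    obtain ⟨t, hts, htl, rfl⟩ := (hresmem c).1 hc
    exact (hcomb_val _ hts htl).1
  have hlb : topk ≤ res.foldl (fun a comb => max a (FComb B n u d comb)) 0 := by
    obtain ⟨comb, hcs, hcl, hach⟩ := hachieve
    have hmem : comb ∈ res := (hresmem comb).2 ⟨comb, hcs, hcl, rfl⟩
    have : FComb B n u d comb ≤ res.foldl (fun a comb => max a (FComb B n u d comb)) 0 := by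
      have h2 : (res.map (FComb B n u d)).foldl max 0 =
          res.foldl (fun a comb => max a (FComb B n u d comb)) 0 := List.foldl_map
      rw [← h2]
      exact (PySem.List.le_foldl_max (res.map (FComb B n u d)) 0).2 _
        (List.mem_map_of_mem hmem)
    exact le_trans hach this
  omega

-- ===== VERDICT (by name: the statement is the Claim_ definition above) =====
theorem solution_spec : Claim_equal_solution := by
  intro board n k u d hdom hpre
  unfold Spec_solution
  by_cases hk0 : k ≤ 0
  · have hguard : (decide (k ≤ 0) || decide (n * n < k)) = true := by
      simp
      omega
    have hB : solution_alt board n k u d = 0 := by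
      show (if (decide (k ≤ 0) || decide (n * n < k)) = true then (0 : Int) else _) = 0
      rw [if_pos hguard]
    rw [hB]
    show ansLoop board n u d (pick_city _ ((n : Int) ^ 2) k [] 0 []) 0 = 0
    by_cases hk : k < 0
    · rw [pick_city]
      simp only [List.length_nil, Nat.cast_zero]
      rw [if_pos (by omega)]
      rfl
    · have hk0' : k = 0 := by omega
      subst hk0'
      rw [pick_city]
      simp only [List.length_nil, Nat.cast_zero]
      rw [if_pos trivial, List.nil_append]
      rw [if_neg (lt_irrefl (0 : Int))]
      have hF0 : FComb board n u d [] = 0 := by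
        rw [FComb, List.foldl_nil, setLen_eq]
        simp
      rw [ansLoop_eq_foldl board n u d [[]] 0 ?_]
      · simp only [List.foldl_cons, List.foldl_nil, hF0, max_self]
      · intro c hc
        rw [List.mem_singleton.1 hc, hF0]
        exact sq_nonneg n
  · by_cases hbig : n * n < k
    · have hn : 0 ≤ n := by
        rcases hpre with h | ⟨h, _⟩ | ⟨h, _⟩
        · exact absurd h hk0
        · exact h
        · exact h
      have hguard : (decide (k ≤ 0) || decide (n * n < k)) = true := by
        simp
        omega
      have hB : solution_alt board n k u d = 0 := by
        show (if (decide (k ≤ 0) || decide (n * n < k)) = true then (0 : Int) else _) = 0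
        rw [if_pos hguard]
      rw [hB]
      show ansLoop board n u d (pick_city _ ((n : Int) ^ 2) k [] 0 []) 0 = 0
      rw [citiesA_eq n]
      have hc2 : (n : Int) ^ 2 = ((cellsL n).length : Int) := by
        rw [length_cellsL n hn, Int.toNat_of_nonneg (mul_nonneg hn hn), pow_two]
      rw [hc2]
      have hres : pick_city (cellsL n) ((cellsL n).length : Int) k [] 0 [] = [] := by
        rw [List.eq_nil_iff_forall_not_mem]
        intro x hx
        rw [pick_city_mem (cellsL n) k (((cellsL n).length : Int) - 0).toNat 0 [] [] x
          le_rfl rfl] at hx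
        rcases hx with hx | ⟨t, hts, htl, _⟩
        · cases hx
        · have := hts.length_le
          rw [Int.toNat_zero, List.drop_zero] at this
          rw [length_cellsL n hn] at this
          simp at htl
          omega
      rw [hres]
      rfl
    · have hn : 0 ≤ n := by
        rcases hpre with h | ⟨h, _⟩ | ⟨h, _⟩
        · exact absurd h hk0
        · exact h
        · exact h
      exact main_eq board n u d k hn (by omega) (by omega)
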